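-- pv_equiv track=rewrite | github.com/GitMonsters/octotetrahedral-agi | core/primitives.py | p_replace_each_object_with_color
-- ===== SOURCE A (Python) =====
-- from typing import List, Dict, Tuple, Optional, Callable, Any, Set
-- from collections import Counter
--
-- Grid = List[List[int]]
--
-- def p_replace_each_object_with_color(grid: Grid) -> Grid:
--     """Replace each connected object with a single solid color (its own)."""
--     bg = _bg(grid)
--     objs = _find_objects(grid, bg)
--     result = [[bg] * len(grid[0]) for _ in range(len(grid))]
--     for obj in objs:
--         r1, c1, r2, c2 = obj['bbox']
--         color = obj['color']
--         for r in range(r1, r2 + 1):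
--             for c in range(c1, c2 + 1):
--                 result[r][c] = color
--     return result
--
-- def _bg(grid: Grid) -> int:
--     counts = Counter(c for row in grid for c in row)
--     return counts.most_common(1)[0][0] if counts else 0
--
-- def _find_objects(grid: Grid, bg: int) -> List[Dict]:
--     rows, cols = len(grid), len(grid[0]) if grid else 0
--     visited = [[False]*cols for _ in range(rows)]
--     objects = []
--     def flood(r, c, color):
--         stack = [(r, c)]
--         cells = []
--         while stack:
--             cr, cc = stack.pop()
--             if cr < 0 or cr >= rows or cc < 0 or cc >= cols:
--                 continue
--             if visited[cr][cc] or grid[cr][cc] != color: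
--                 continue
--             visited[cr][cc] = True
--             cells.append((cr, cc))
--             for dr, dc in [(-1,0),(1,0),(0,-1),(0,1)]:
--                 stack.append((cr+dr, cc+dc))
--         return cells
--     for r in range(rows):
--         for c in range(cols):
--             if not visited[r][c] and grid[r][c] != bg:
--                 cells = flood(r, c, grid[r][c])
--                 if cells:
--                     min_r = min(cr for cr, _ in cells)
--                     max_r = max(cr for cr, _ in cells)
--                     min_c = min(cc for _, cc in cells)
--                     max_c = max(cc for _, cc in cells)
--                     objects.append({
--                         'color': grid[r][c], 'cells': cells,
--                         'bbox': (min_r, min_c, max_r, max_c),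
--                         'size': len(cells),
--                     })
--     return objects
-- ===== SOURCE B (Python) =====
-- def p_replace_each_object_with_color(grid):
--     """Replace each connected object with a single solid color (its own)."""
--     rows = len(grid)
--     cols = len(grid[0]) if grid else 0
--     # background = most common color (first-seen wins ties)
--     counts = {}
--     for row in grid:
--         for v in row:
--             counts[v] = counts.get(v, 0) + 1
--     bg = max(counts, key=counts.get) if counts else 0
--     # iterative connected-component labeling (label relaxation): every non-bg cell
--     # starts with its own row-major index as label; repeatedly replace each label
--     # by the minimum over the cell and its same-color neighbours, until fixpoint.
--     lab = [[(r * cols + c) if grid[r][c] != bg else -1 for c in range(cols)]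
--            for r in range(rows)]
--     while True:
--         new = [[min([lab[r][c]] + [lab[nr][nc]
--                      for nr, nc in ((r - 1, c), (r + 1, c), (r, c - 1), (r, c + 1))
--                      if 0 <= nr < rows and 0 <= nc < cols and grid[nr][nc] == grid[r][c]])
--                 if grid[r][c] != bg else -1
--                 for c in range(cols)]
--                for r in range(rows)]
--         if new == lab:
--             break
--         lab = new
--     # a cell is its component's representative iff its label is its own index, i.e.
--     # it is the first (row-major) cell of the component; that matches A's emit order
--     boxes = []
--     for r in range(rows):
--         for c in range(cols):
--             if grid[r][c] != bg and lab[r][c] == r * cols + c: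
--                 cells = [(rr, cc) for rr in range(rows) for cc in range(cols)
--                          if lab[rr][cc] == r * cols + c]
--                 boxes.append((min(p[0] for p in cells), min(p[1] for p in cells),
--                               max(p[0] for p in cells), max(p[1] for p in cells),
--                               grid[r][c]))
--     # paint the boxes into a sparse map, then emit the grid by lookup
--     painted = {}
--     for (r1, c1, r2, c2, color) in boxes:
--         for r in range(r1, r2 + 1):
--             for c in range(c1, c2 + 1):
--                 painted[(r, c)] = color
--     return [[painted.get((r, c), bg) for c in range(cols)] for r in range(rows)]
-- ===== Notes on version B (the rewrite author's own statement) =====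
-- stated objective: alternative
-- what changed: Connected components are found by iterative connected-component labeling (every non-bg cell starts with its own row-major index as label and labels relax to the minimum over same-color neighbours until a global fixpoint), instead of A's per-component stack-based DFS flood fill with a visited matrix; a component's representative is the cell whose label equals its own index (the first row-major cell, so A's emit order is preserved), its cells are gathered by label lookup, and the output grid is built functionally by per-cell lookup in a painted map instead of mutating a preallocated matrix.
import Mathlib
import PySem

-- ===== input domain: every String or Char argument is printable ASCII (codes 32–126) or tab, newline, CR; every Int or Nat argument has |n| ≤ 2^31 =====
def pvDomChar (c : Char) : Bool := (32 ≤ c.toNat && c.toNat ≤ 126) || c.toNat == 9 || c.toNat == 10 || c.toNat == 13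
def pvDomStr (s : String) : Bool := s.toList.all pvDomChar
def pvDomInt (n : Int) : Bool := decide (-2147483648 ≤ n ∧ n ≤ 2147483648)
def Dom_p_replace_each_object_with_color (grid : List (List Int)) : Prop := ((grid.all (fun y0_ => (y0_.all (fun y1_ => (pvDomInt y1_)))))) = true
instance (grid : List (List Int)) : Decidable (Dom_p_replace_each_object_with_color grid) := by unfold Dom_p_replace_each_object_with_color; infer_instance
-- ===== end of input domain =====

-- B finds the connected objects by iterative connected-component labeling (min-label
-- relaxation to a global fixpoint) instead of A's per-component stack-based flood fill,
-- picks the background by a first-max dict scan instead of Counter.most_common, and builds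
-- the output functionally from a painted map instead of mutating a matrix (alternative).

-- ===== PORT A =====
-- helpers for A: Python-exact 2-D access (used only at indices the Python also reads)
def pvGridAt (g : List (List Int)) (r c : Int) : Int :=
  PySem.List.pyGetD (PySem.List.pyGetD g r []) c 0

def pvVGet (v : List (List Bool)) (r c : Int) : Bool :=
  PySem.List.pyGetD (PySem.List.pyGetD v r []) c false

def pvVSet (v : List (List Bool)) (r c : Int) : List (List Bool) :=
  PySem.List.pySetD v r (PySem.List.pySetD (PySem.List.pyGetD v r []) c true)

-- _bg: Counter + most_common(1)[0][0] (most_common(1) = stable sort by count, descending, first item)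
def pvBgA (grid : List (List Int)) : Int :=
  let counts := PySem.Dict.counter (grid.flatMap (fun row => row))
  if counts.size ≠ 0 then
    (PySem.List.pyGetD ((PySem.List.sorted counts.items (fun p => p.2) true).take 1) 0 (0, 0)).1
  else 0

-- flood's while-loop; the stack top is the list head (Python pushes/pops at the right end: same LIFO order).
-- The fuel strictly exceeds the number of loop steps (proved below); it only makes the recursion structural.
def pvFlood (grid : List (List Int)) (rows cols color : Int) :
    Nat → List (List Bool) → List (Int × Int) → List (Int × Int) →
    List (Int × Int) × List (List Bool)
  | 0, visited, _, cells => (cells, visited)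
  | _ + 1, visited, [], cells => (cells, visited)
  | fuel + 1, visited, (cr, cc) :: rest, cells =>
    if cr < 0 ∨ rows ≤ cr ∨ cc < 0 ∨ cols ≤ cc then
      pvFlood grid rows cols color fuel visited rest cells
    else if pvVGet visited cr cc = true ∨ pvGridAt grid cr cc ≠ color then
      pvFlood grid rows cols color fuel visited rest cells
    else
      pvFlood grid rows cols color fuel (pvVSet visited cr cc)
        ((cr, cc + 1) :: (cr, cc - 1) :: (cr + 1, cc) :: (cr - 1, cc) :: rest)
        (cells ++ [(cr, cc)])

-- an object: (color, cells, (min_r, min_c, max_r, max_c), size)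
abbrev pvObj : Type := Int × List (Int × Int) × (Int × Int × Int × Int) × Int

-- the double scan of _find_objects, state = (visited, objects)
def pvScanA (grid : List (List Int)) (rows cols bg : Int) :
    List (List Bool) × List pvObj :=
  (PySem.List.pyRange 0 rows 1).foldl (fun st r =>
    (PySem.List.pyRange 0 cols 1).foldl (fun st c =>
      if ¬ pvVGet st.1 r c = true ∧ pvGridAt grid r c ≠ bg then
        let res := pvFlood grid rows cols (pvGridAt grid r c)
          (5 * (rows.toNat * cols.toNat) + 2) st.1 [(r, c)] []
        if res.1 ≠ [] then
          (res.2, st.2 ++ [(pvGridAt grid r c, res.1,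
            ((PySem.List.min? (res.1.map (fun p => p.1)) (fun x => x)).getD 0,
             (PySem.List.min? (res.1.map (fun p => p.2)) (fun x => x)).getD 0,
             (PySem.List.max? (res.1.map (fun p => p.1)) (fun x => x)).getD 0,
             (PySem.List.max? (res.1.map (fun p => p.2)) (fun x => x)).getD 0),
            PySem.List.len res.1)])
        else (res.2, st.2)
      else st) st)
    ((PySem.List.pyRange 0 rows 1).map (fun _ => List.replicate cols.toNat false), [])

def p_replace_each_object_with_color (grid : List (List Int)) : List (List Int) :=
  let bg := pvBgA grid
  let rows := PySem.List.len grid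
  let cols := if grid ≠ [] then PySem.List.len (PySem.List.pyGetD grid 0 []) else 0
  let objs := (pvScanA grid rows cols bg).2
  let result := (PySem.List.pyRange 0 rows 1).map
    (fun _ => List.replicate (PySem.List.pyGetD grid 0 []).length bg)
  objs.foldl (fun result obj =>
    (PySem.List.pyRange obj.2.2.1.1 (obj.2.2.1.2.2.1 + 1) 1).foldl (fun result r =>
      (PySem.List.pyRange obj.2.2.1.2.1 (obj.2.2.1.2.2.2 + 1) 1).foldl (fun result c =>
        PySem.List.pySetD result r
          (PySem.List.pySetD (PySem.List.pyGetD result r []) c obj.1)) result) result) result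

-- ===== PORT B =====
-- counts built with a plain dict; bg = max(counts, key=counts.get) (first key attaining the max)
def pvBgB (grid : List (List Int)) : Int :=
  let counts := grid.foldl (fun d row =>
    row.foldl (fun d v => d.insert v (d.getD v 0 + 1)) d)
    (PySem.Dict.empty : PySem.Dict Int Int)
  if counts.size ≠ 0 then PySem.List.maxD counts.keys (fun k => counts.getD k 0) 0 else 0

def pvNbrs (p : Int × Int) : List (Int × Int) :=
  [(p.1 - 1, p.2), (p.1 + 1, p.2), (p.1, p.2 - 1), (p.1, p.2 + 1)]

-- a rows×cols matrix built by nested comprehensions, as in Source B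
def pvMkM (rows cols : Int) (f : Int → Int → Int) : List (List Int) :=
  (PySem.List.pyRange 0 rows 1).map (fun r => (PySem.List.pyRange 0 cols 1).map (fun c => f r c))

def pvIdx (cols : Int) (p : Int × Int) : Int := p.1 * cols + p.2

-- the candidate list [lab[r][c]] + [lab[nr][nc] for ... if in range and same color]
def pvCand (grid : List (List Int)) (rows cols : Int) (lab : List (List Int)) (r c : Int) :
    List Int :=
  pvGridAt lab r c ::
    ((pvNbrs (r, c)).filter (fun q =>
      decide (0 ≤ q.1 ∧ q.1 < rows ∧ 0 ≤ q.2 ∧ q.2 < cols ∧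
        pvGridAt grid q.1 q.2 = pvGridAt grid r c))).map (fun q => pvGridAt lab q.1 q.2)

-- one relaxation round: new[r][c] = min(candidates) on non-bg cells, -1 on bg cells
def pvStepM (grid : List (List Int)) (rows cols bg : Int) (lab : List (List Int)) :
    List (List Int) :=
  pvMkM rows cols (fun r c =>
    if pvGridAt grid r c ≠ bg then
      (PySem.List.min? (pvCand grid rows cols lab r c) (fun x => x)).getD 0
    else -1)

-- the while-True loop: relax until a round changes nothing.  The fuel strictly exceeds
-- the number of rounds (each non-final round strictly decreases the label sum; proved below),
-- so it only makes the recursion structural.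
def pvIterL (grid : List (List Int)) (rows cols bg : Int) :
    Nat → List (List Int) → List (List Int)
  | 0, lab => lab
  | fuel + 1, lab =>
    if pvStepM grid rows cols bg lab = lab then lab
    else pvIterL grid rows cols bg fuel (pvStepM grid rows cols bg lab)

def pvLab0 (grid : List (List Int)) (rows cols bg : Int) : List (List Int) :=
  pvMkM rows cols (fun r c => if pvGridAt grid r c ≠ bg then pvIdx cols (r, c) else -1)

-- [(rr, cc) for rr in range(rows) for cc in range(cols) if lab[rr][cc] == t]
def pvCellsOf (rows cols : Int) (lab : List (List Int)) (t : Int) : List (Int × Int) :=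
  (PySem.List.pyRange 0 rows 1).flatMap (fun rr =>
    ((PySem.List.pyRange 0 cols 1).filter (fun cc => decide (pvGridAt lab rr cc = t))).map
      (fun cc => (rr, cc)))

-- body of B's representative scan: a cell is a representative iff its label is its own index
def pvBodyB (grid : List (List Int)) (rows cols bg : Int) (lab : List (List Int))
    (boxes : List (Int × Int × Int × Int × Int)) (r c : Int) :
    List (Int × Int × Int × Int × Int) :=
  if pvGridAt grid r c ≠ bg ∧ pvGridAt lab r c = pvIdx cols (r, c) then
    boxes ++ [
      ((PySem.List.min? ((pvCellsOf rows cols lab (pvIdx cols (r, c))).map (fun p => p.1)) (fun x => x)).getD 0,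
       (PySem.List.min? ((pvCellsOf rows cols lab (pvIdx cols (r, c))).map (fun p => p.2)) (fun x => x)).getD 0,
       (PySem.List.max? ((pvCellsOf rows cols lab (pvIdx cols (r, c))).map (fun p => p.1)) (fun x => x)).getD 0,
       (PySem.List.max? ((pvCellsOf rows cols lab (pvIdx cols (r, c))).map (fun p => p.2)) (fun x => x)).getD 0,
       pvGridAt grid r c)]
  else boxes

def pvScanB (grid : List (List Int)) (rows cols bg : Int) (lab : List (List Int)) :
    List (Int × Int × Int × Int × Int) :=
  (PySem.List.pyRange 0 rows 1).foldl (fun boxes r =>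
    (PySem.List.pyRange 0 cols 1).foldl (fun boxes c =>
      pvBodyB grid rows cols bg lab boxes r c) boxes) []

def p_replace_each_object_with_color_alt (grid : List (List Int)) : List (List Int) :=
  let rows := PySem.List.len grid
  let cols := if grid ≠ [] then PySem.List.len (PySem.List.pyGetD grid 0 []) else 0
  let bg := pvBgB grid
  let lab := pvIterL grid rows cols bg
    (rows.toNat * cols.toNat * (rows.toNat * cols.toNat) + 1) (pvLab0 grid rows cols bg)
  let boxes := pvScanB grid rows cols bg lab
  let painted := boxes.foldl (fun d b =>
    (PySem.List.pyRange b.1 (b.2.2.1 + 1) 1).foldl (fun d r =>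
      (PySem.List.pyRange b.2.1 (b.2.2.2.1 + 1) 1).foldl (fun d c =>
        d.insert (r, c) b.2.2.2.2) d) d)
    (PySem.Dict.empty : PySem.Dict (Int × Int) Int)
  (PySem.List.pyRange 0 rows 1).map (fun r =>
    (PySem.List.pyRange 0 cols 1).map (fun c => painted.getD (r, c) bg))

-- ===== PRECONDITION & SPEC =====
-- Pre_ excludes exactly the grids on which the Python raises IndexError: some row shorter than row 0
-- (both programs index columns 0..len(grid[0])-1 of every row).
def Pre_p_replace_each_object_with_color (grid : List (List Int)) : Prop :=
  ∀ row ∈ grid, (grid.headD []).length ≤ row.length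
instance (grid : List (List Int)) : Decidable (Pre_p_replace_each_object_with_color grid) := by
  unfold Pre_p_replace_each_object_with_color; infer_instance
def pvWitness_p_replace_each_object_with_color : List (List Int) := [[1, 0], [0, 2]]
def Spec_p_replace_each_object_with_color (grid : List (List Int)) (out : List (List Int)) : Prop := out = p_replace_each_object_with_color_alt grid
instance (grid : List (List Int)) (out : List (List Int)) : Decidable (Spec_p_replace_each_object_with_color grid out) := by unfold Spec_p_replace_each_object_with_color; infer_instance

-- ===== CLAIM (what is proved, stated in full; the proofs are below) =====
def Claim_equal_p_replace_each_object_with_color : Prop := ∀ (grid : List (List Int)), Dom_p_replace_each_object_with_color grid → Pre_p_replace_each_object_with_color grid → Spec_p_replace_each_object_with_color grid (p_replace_each_object_with_color grid)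

-- ===== LEMMAS AND PROOFS =====

-- ---- generic graph notions shared by both correctness arguments ----
def pvInR (rows cols : Int) (p : Int × Int) : Prop :=
  0 ≤ p.1 ∧ p.1 < rows ∧ 0 ≤ p.2 ∧ p.2 < cols

def pvGood (grid : List (List Int)) (rows cols color : Int) (V : Int × Int → Prop)
    (p : Int × Int) : Prop :=
  pvInR rows cols p ∧ pvGridAt grid p.1 p.2 = color ∧ ¬ V p

def pvReach (grid : List (List Int)) (rows cols color : Int) (V : Int × Int → Prop)
    (s p : Int × Int) : Prop :=
  Relation.ReflTransGen (fun a b => b ∈ pvNbrs a ∧ pvGood grid rows cols color V b) s p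

theorem pvGood_congr {grid rows cols color} {V W : Int × Int → Prop}
    (h : ∀ x, pvInR rows cols x → (V x ↔ W x)) (p : Int × Int) :
    pvGood grid rows cols color V p ↔ pvGood grid rows cols color W p := by
  unfold pvGood
  constructor
  · rintro ⟨h1, h2, h3⟩; exact ⟨h1, h2, fun hw => h3 ((h p h1).mpr hw)⟩
  · rintro ⟨h1, h2, h3⟩; exact ⟨h1, h2, fun hw => h3 ((h p h1).mp hw)⟩

theorem pvReach_congr {grid rows cols color} {V W : Int × Int → Prop}
    (h : ∀ x, pvInR rows cols x → (V x ↔ W x)) (s p : Int × Int) :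
    pvReach grid rows cols color V s p ↔ pvReach grid rows cols color W s p := by
  constructor <;> intro hr
  · exact Relation.ReflTransGen.mono
      (fun a b hab => ⟨hab.1, (pvGood_congr h b).mp hab.2⟩) hr
  · exact Relation.ReflTransGen.mono
      (fun a b hab => ⟨hab.1, (pvGood_congr h b).mpr hab.2⟩) hr

theorem pvReach_good {grid rows cols color V} {s p : Int × Int}
    (hs : pvGood grid rows cols color V s) (h : pvReach grid rows cols color V s p) :
    pvGood grid rows cols color V p := by
  induction h with
  | refl => exact hs
  | tail _ hstep _ => exact hstep.2

-- ---- A-side: visited matrix ----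
def pvShape (v : List (List Bool)) (rows cols : Int) : Prop :=
  v.length = rows.toNat ∧ ∀ row ∈ v, row.length = cols.toNat

def pvVTrue (v : List (List Bool)) (p : Int × Int) : Prop := pvVGet v p.1 p.2 = true

def pvUnvis (v : List (List Bool)) : Nat := (v.map (fun row => row.count false)).sum

theorem pvShape_init (rows cols : Int) :
    pvShape ((PySem.List.pyRange 0 rows 1).map (fun _ => List.replicate cols.toNat false)) rows cols := by
  constructor
  · simp [PySem.List.length_pyRange_one]
  · intro row hrow
    rcases List.mem_map.mp hrow with ⟨_, _, rfl⟩
    simp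

theorem pvUnvis_le {v : List (List Bool)} {rows cols : Int} (h : pvShape v rows cols) :
    pvUnvis v ≤ rows.toNat * cols.toNat := by
  obtain ⟨hlen, hrow⟩ := h
  unfold pvUnvis
  calc (v.map (fun row => row.count false)).sum
      ≤ (v.map (fun row => row.count false)).length • (cols.toNat) := by
        apply List.sum_le_card_nsmul
        intro x hx
        rcases List.mem_map.mp hx with ⟨row, hr, rfl⟩
        exact (hrow row hr) ▸ List.count_le_length
    _ = rows.toNat * cols.toNat := by simp [hlen]

theorem pvVGet_vset {v : List (List Bool)} {rows cols : Int} (h : pvShape v rows cols)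
    {r c : Int} (hr : pvInR rows cols (r, c)) (r' c' : Int) (hr' : pvInR rows cols (r', c')) :
    pvVGet (pvVSet v r c) r' c' = if (r', c') = (r, c) then true else pvVGet v r' c' := by
  obtain ⟨hlen, hrowlen⟩ := h
  obtain ⟨h1, h2, h3, h4⟩ := hr
  obtain ⟨g1, g2, g3, g4⟩ := hr'
  simp only at h1 h2 h3 h4 g1 g2 g3 g4
  have hrN : r.toNat < v.length := by omega
  have hrN' : r'.toNat < v.length := by omega
  have hgr : PySem.List.pyGetD v r [] = v[r.toNat] :=
    PySem.List.pyGetD_eq_getElem v [] h1 (by omega)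
  have hgr' : PySem.List.pyGetD v r' [] = v[r'.toNat] :=
    PySem.List.pyGetD_eq_getElem v [] g1 (by omega)
  have hrl : (v[r.toNat]).length = cols.toNat := hrowlen _ (List.getElem_mem hrN)
  have hrl' : (v[r'.toNat]).length = cols.toNat := hrowlen _ (List.getElem_mem hrN')
  simp only [pvVGet, pvVSet]
  rw [PySem.List.pySetD_of_nonneg v _ h1]
  rw [PySem.List.pyGetD_eq_getElem (v.set r.toNat _) [] g1 (by rw [List.length_set]; omega)]
  rw [hgr', hgr, PySem.List.pySetD_of_nonneg _ _ h3]
  rw [List.getElem_set (by rw [List.length_set]; omega)]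
  by_cases hrr : r' = r
  · subst hrr
    rw [if_pos rfl]
    rw [PySem.List.pyGetD_eq_getElem _ false g3 (by rw [List.length_set]; omega)]
    rw [List.getElem_set (by rw [List.length_set]; omega)]
    by_cases hcc : c' = c
    · subst hcc
      rw [if_pos (by omega)]
      simp
    · rw [if_neg (by omega)]
      rw [PySem.List.pyGetD_eq_getElem _ false g3 (by omega)]
      simp [Prod.ext_iff, hcc]
  · rw [if_neg (by omega)]
    simp [Prod.ext_iff, hrr]

theorem pvShape_vset {v : List (List Bool)} {rows cols : Int} (h : pvShape v rows cols)
    {r c : Int} (hr : pvInR rows cols (r, c)) : pvShape (pvVSet v r c) rows cols := by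
  obtain ⟨hlen, hrowlen⟩ := h
  obtain ⟨h1, h2, h3, h4⟩ := hr
  simp only at h1 h2 h3 h4
  have hrN : r.toNat < v.length := by omega
  unfold pvVSet
  rw [PySem.List.pySetD_of_nonneg v _ h1]
  constructor
  · simpa using hlen
  · intro row hrow
    rcases List.mem_iff_getElem.mp hrow with ⟨j, hj, rfl⟩
    by_cases hjr : j = r.toNat
    · subst hjr
      rw [List.getElem_set_self (by omega)]
      rw [PySem.List.pyGetD_eq_getElem v [] h1 (by omega)]
      rw [PySem.List.pySetD_of_nonneg _ _ h3]
      simp [hrowlen _ (List.getElem_mem hrN)]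
    · rw [List.getElem_set_ne (by omega) (by simpa using hj)]
      exact hrowlen _ (List.getElem_mem _)

theorem pvSumSet (l : List Nat) (n : Nat) (h : n < l.length) (v : Nat) :
    (l.set n v).sum + l[n] = l.sum + v := by
  have h2 : l.sum = (l.take n).sum + (l[n] + (l.drop (n+1)).sum) := by
    conv_lhs => rw [← List.take_append_drop n l, List.drop_eq_getElem_cons h]
    rw [List.sum_append, List.sum_cons]
  rw [List.sum_set, if_pos h, h2]; omega

theorem pvCountSet (row : List Bool) (c : Nat) (h : c < row.length) (hf : row[c] = false) :
    (row.set c true).count false + 1 = row.count false := by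
  rw [List.set_eq_take_cons_drop true h]
  conv_rhs => rw [← List.take_append_drop c row, List.drop_eq_getElem_cons h, hf]
  simp [List.count_append]; omega

theorem pvUnvis_vset {v : List (List Bool)} {rows cols : Int} (h : pvShape v rows cols)
    {r c : Int} (hr : pvInR rows cols (r, c)) (hf : ¬ pvVTrue v (r, c)) :
    pvUnvis (pvVSet v r c) + 1 = pvUnvis v := by
  obtain ⟨hlen, hrowlen⟩ := h
  obtain ⟨h1, h2, h3, h4⟩ := hr
  simp only at h1 h2 h3 h4
  have hrN : r.toNat < v.length := by omega
  have hgr : PySem.List.pyGetD v r [] = v[r.toNat] :=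
    PySem.List.pyGetD_eq_getElem v [] h1 (by omega)
  have hrl : (v[r.toNat]).length = cols.toNat := hrowlen _ (List.getElem_mem hrN)
  have hcN : c.toNat < (v[r.toNat]).length := by omega
  have hfalse : (v[r.toNat])[c.toNat] = false := by
    simp only [pvVTrue, pvVGet] at hf
    rw [hgr, PySem.List.pyGetD_eq_getElem _ false h3 (by omega)] at hf
    simpa using hf
  unfold pvVSet pvUnvis
  rw [PySem.List.pySetD_of_nonneg v _ h1, hgr, PySem.List.pySetD_of_nonneg _ _ h3]
  have hcount : ((v[r.toNat]).set c.toNat true).count false + 1 = (v[r.toNat]).count false :=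
    pvCountSet _ _ hcN hfalse
  have hmap : (v.set r.toNat ((v[r.toNat]).set c.toNat true)).map (fun row => row.count false)
      = (v.map (fun row => row.count false)).set r.toNat (((v[r.toNat]).set c.toNat true).count false) :=
    List.map_set
  rw [hmap]
  have hlenm : r.toNat < (v.map (fun row => row.count false)).length := by simpa using hrN
  have := pvSumSet (v.map (fun row => row.count false)) r.toNat hlenm
    (((v[r.toNat]).set c.toNat true).count false)
  simp only [List.getElem_map] at this
  omega

-- ---- A-side: DFS correctness ----
def pvRF (grid : List (List Int)) (rows cols color : Int) (V : Int × Int → Prop)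
    (stack : List (Int × Int)) (p : Int × Int) : Prop :=
  ∃ s ∈ stack, pvGood grid rows cols color V s ∧ pvReach grid rows cols color V s p

theorem pvRF_skip {grid rows cols color} {V : Int × Int → Prop} {t : Int × Int}
    {rest : List (Int × Int)} (ht : ¬ pvGood grid rows cols color V t) (p : Int × Int) :
    pvRF grid rows cols color V (t :: rest) p ↔ pvRF grid rows cols color V rest p := by
  constructor
  · rintro ⟨s, hs, hg, hr⟩
    rcases List.mem_cons.mp hs with h | h
    · exact absurd (h ▸ hg) ht
    · exact ⟨s, h, hg, hr⟩
  · rintro ⟨s, hs, hg, hr⟩; exact ⟨s, List.mem_cons_of_mem _ hs, hg, hr⟩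

theorem pvRF_mem_congr {grid rows cols color} {V : Int × Int → Prop}
    {l1 l2 : List (Int × Int)} (h : ∀ x, x ∈ l1 ↔ x ∈ l2) (p : Int × Int) :
    pvRF grid rows cols color V l1 p ↔ pvRF grid rows cols color V l2 p := by
  unfold pvRF
  constructor <;> rintro ⟨s, hs, hg, hr⟩
  · exact ⟨s, (h s).mp hs, hg, hr⟩
  · exact ⟨s, (h s).mpr hs, hg, hr⟩

theorem pvRF_congr {grid rows cols color} {V W : Int × Int → Prop}
    (h : ∀ x, pvInR rows cols x → (V x ↔ W x)) (stack : List (Int × Int)) (p : Int × Int) :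
    pvRF grid rows cols color V stack p ↔ pvRF grid rows cols color W stack p := by
  unfold pvRF
  constructor <;> rintro ⟨s, hs, hg, hr⟩
  · exact ⟨s, hs, (pvGood_congr h s).mp hg, (pvReach_congr h s p).mp hr⟩
  · exact ⟨s, hs, (pvGood_congr h s).mpr hg, (pvReach_congr h s p).mpr hr⟩

-- peeling the last visit to t out of a path avoiding V
theorem pvReach_peel {grid rows cols color} {V : Int × Int → Prop} {t : Int × Int}
    {a p : Int × Int} (hr : pvReach grid rows cols color V a p) :
    p = t ∨
    (∃ s', s' ∈ pvNbrs t ∧ pvGood grid rows cols color (fun x => V x ∨ x = t) s' ∧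
      pvReach grid rows cols color (fun x => V x ∨ x = t) s' p) ∨
    (pvReach grid rows cols color (fun x => V x ∨ x = t) a p ∧ a ≠ t) := by
  induction hr with
  | refl =>
    by_cases hat : a = t
    · exact Or.inl hat
    · exact Or.inr (Or.inr ⟨Relation.ReflTransGen.refl, hat⟩)
  | tail hq hstep ih =>
    rename_i q p'
    by_cases hp : p' = t
    · exact Or.inl hp
    · have goodp' : pvGood grid rows cols color (fun x => V x ∨ x = t) p' :=
        ⟨hstep.2.1, hstep.2.2.1, fun h => h.elim hstep.2.2.2 hp⟩
      rcases ih with hqt | ⟨s', hm, hg, hr'⟩ | ⟨hra, hane⟩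
      · subst hqt
        exact Or.inr (Or.inl ⟨p', hstep.1, goodp', Relation.ReflTransGen.refl⟩)
      · exact Or.inr (Or.inl ⟨s', hm, hg, hr'.tail ⟨hstep.1, goodp'⟩⟩)
      · exact Or.inr (Or.inr ⟨hra.tail ⟨hstep.1, goodp'⟩, hane⟩)

-- the key DFS identity: marking the good top cell t and pushing its neighbours
theorem pvRF_mark {grid rows cols color} {V : Int × Int → Prop} {t : Int × Int}
    {rest : List (Int × Int)} (ht : pvGood grid rows cols color V t) (p : Int × Int) :
    pvRF grid rows cols color V (t :: rest) p ↔
      (p = t ∨ pvRF grid rows cols color (fun x => V x ∨ x = t) (pvNbrs t ++ rest) p) := by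
  have hmono : ∀ s x, pvReach grid rows cols color (fun x => V x ∨ x = t) s x →
      pvReach grid rows cols color V s x := fun s x h =>
    Relation.ReflTransGen.mono
      (fun a b hab => ⟨hab.1, hab.2.1, hab.2.2.1, fun hv => hab.2.2.2 (Or.inl hv)⟩) h
  have hgmono : ∀ s, pvGood grid rows cols color (fun x => V x ∨ x = t) s →
      pvGood grid rows cols color V s := fun s hg =>
    ⟨hg.1, hg.2.1, fun hv => hg.2.2 (Or.inl hv)⟩
  constructor
  · rintro ⟨s, hs, hg, hr⟩
    rcases pvReach_peel (t := t) hr with hpt | ⟨s', hm, hg', hr'⟩ | ⟨hra, hane⟩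
    · exact Or.inl hpt
    · exact Or.inr ⟨s', List.mem_append_left _ hm, hg', hr'⟩
    · rcases List.mem_cons.mp hs with rfl | hsr
      · exact absurd rfl hane
      · exact Or.inr ⟨s, List.mem_append_right _ hsr,
          ⟨hg.1, hg.2.1, fun h => h.elim hg.2.2 hane⟩, hra⟩
  · rintro (rfl | ⟨s, hs, hg, hr⟩)
    · exact ⟨p, List.mem_cons_self, ht, Relation.ReflTransGen.refl⟩
    · rcases List.mem_append.mp hs with hm | hm
      · exact ⟨t, List.mem_cons_self, ht,
          Relation.ReflTransGen.head ⟨hm, hgmono s hg⟩ (hmono s p hr)⟩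
      · exact ⟨s, List.mem_cons_of_mem _ hm, hgmono s hg, hmono s p hr⟩

theorem pvFlood_spec (grid : List (List Int)) (rows cols color : Int) :
    ∀ (fuel : Nat) (visited : List (List Bool)) (stack : List (Int × Int))
      (cells : List (Int × Int)),
      pvShape visited rows cols →
      5 * pvUnvis visited + stack.length < fuel →
      pvShape (pvFlood grid rows cols color fuel visited stack cells).2 rows cols ∧
      (∀ p, pvInR rows cols p →
        (pvVTrue (pvFlood grid rows cols color fuel visited stack cells).2 p ↔
          (pvVTrue visited p ∨ pvRF grid rows cols color (pvVTrue visited) stack p))) ∧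
      (∀ p, p ∈ (pvFlood grid rows cols color fuel visited stack cells).1 ↔
        (p ∈ cells ∨ pvRF grid rows cols color (pvVTrue visited) stack p)) := by
  intro fuel
  induction fuel with
  | zero => intro visited stack cells _ hfuel; omega
  | succ fuel ih =>
    intro visited stack cells hshape hfuel
    match stack with
    | [] =>
      refine ⟨hshape, ?_, ?_⟩ <;> intro p <;> simp [pvFlood, pvRF]
    | (cr, cc) :: rest =>
      by_cases h1 : cr < 0 ∨ rows ≤ cr ∨ cc < 0 ∨ cols ≤ cc
      · have heq : pvFlood grid rows cols color (fuel + 1) visited ((cr, cc) :: rest) cells =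
            pvFlood grid rows cols color fuel visited rest cells := by
          simp [pvFlood, h1]
        have hng : ¬ pvGood grid rows cols color (pvVTrue visited) (cr, cc) := by
          rintro ⟨⟨a1, a2, a3, a4⟩, -, -⟩
          simp only at a1 a2 a3 a4
          omega
        rw [heq]
        obtain ⟨s1, s2, s3⟩ := ih visited rest cells hshape (by simp at hfuel ⊢; omega)
        refine ⟨s1, ?_, ?_⟩
        · intro p hp; rw [s2 p hp, pvRF_skip hng]
        · intro p; rw [s3 p, pvRF_skip hng]
      · by_cases h2 : pvVGet visited cr cc = true ∨ pvGridAt grid cr cc ≠ color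
        · have heq : pvFlood grid rows cols color (fuel + 1) visited ((cr, cc) :: rest) cells =
              pvFlood grid rows cols color fuel visited rest cells := by
            simp only [pvFlood]
            rw [if_neg h1, if_pos h2]
          have hng : ¬ pvGood grid rows cols color (pvVTrue visited) (cr, cc) := by
            rintro ⟨-, hcol, hnv⟩
            rcases h2 with hv | hc
            · exact hnv hv
            · exact hc hcol
          rw [heq]
          obtain ⟨s1, s2, s3⟩ := ih visited rest cells hshape (by simp at hfuel ⊢; omega)
          refine ⟨s1, ?_, ?_⟩
          · intro p hp; rw [s2 p hp, pvRF_skip hng]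
          · intro p; rw [s3 p, pvRF_skip hng]
        · push Not at h1 h2
          have hin : pvInR rows cols (cr, cc) := ⟨h1.1, h1.2.1, h1.2.2.1, h1.2.2.2⟩
          have hnv : ¬ pvVTrue visited (cr, cc) := by
            simpa [pvVTrue] using h2.1
          have hgood : pvGood grid rows cols color (pvVTrue visited) (cr, cc) :=
            ⟨hin, h2.2, hnv⟩
          have heq : pvFlood grid rows cols color (fuel + 1) visited ((cr, cc) :: rest) cells =
              pvFlood grid rows cols color fuel (pvVSet visited cr cc)
                ((cr, cc + 1) :: (cr, cc - 1) :: (cr + 1, cc) :: (cr - 1, cc) :: rest)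
                (cells ++ [(cr, cc)]) := by
            simp only [pvFlood]
            rw [if_neg (by omega), if_neg (by push Not; exact ⟨h2.1, h2.2⟩)]
          rw [heq]
          have hshape' := pvShape_vset hshape hin
          have hunvis := pvUnvis_vset hshape hin hnv
          obtain ⟨s1, s2, s3⟩ := ih (pvVSet visited cr cc)
            ((cr, cc + 1) :: (cr, cc - 1) :: (cr + 1, cc) :: (cr - 1, cc) :: rest)
            (cells ++ [(cr, cc)]) hshape'
            (by simp only [List.length_cons] at hfuel ⊢; omega)
          -- the marked visited set, pointwise on in-range cells
          have hvt : ∀ x, pvInR rows cols x →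
              (pvVTrue (pvVSet visited cr cc) x ↔ (pvVTrue visited x ∨ x = (cr, cc))) := by
            rintro ⟨x1, x2⟩ hx
            have := pvVGet_vset hshape hin x1 x2 hx
            simp only [pvVTrue, this]
            by_cases hxe : (x1, x2) = (cr, cc) <;> simp [hxe]
          have hstk : ∀ x : Int × Int,
              x ∈ ((cr, cc + 1) :: (cr, cc - 1) :: (cr + 1, cc) :: (cr - 1, cc) :: rest) ↔
              x ∈ pvNbrs (cr, cc) ++ rest := by
            intro x; simp [pvNbrs]; tauto
          have hRF : ∀ p, pvRF grid rows cols color (pvVTrue (pvVSet visited cr cc))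
              ((cr, cc + 1) :: (cr, cc - 1) :: (cr + 1, cc) :: (cr - 1, cc) :: rest) p ↔
              (pvRF grid rows cols color (fun x => pvVTrue visited x ∨ x = (cr, cc))
                (pvNbrs (cr, cc) ++ rest) p) := by
            intro p
            rw [pvRF_mem_congr hstk, pvRF_congr hvt]
          refine ⟨s1, ?_, ?_⟩
          · intro p hp
            rw [s2 p hp, hvt p hp, hRF p, pvRF_mark hgood]
            tauto
          · intro p
            rw [s3 p, hRF p, pvRF_mark hgood]
            simp only [List.mem_append, List.mem_singleton]
            tauto

-- ---- min/max over lists with equal membership ----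
theorem pvMin?_eq_of_mem_iff {xs ys : List Int} (h : ∀ a, a ∈ xs ↔ a ∈ ys) :
    PySem.List.min? xs (fun x => x) = PySem.List.min? ys (fun x => x) := by
  cases hx : PySem.List.min? xs (fun x => x) with
  | none =>
    rw [PySem.List.min?_eq_none_iff] at hx
    subst hx
    have : ys = [] := by
      cases hy : ys with
      | nil => rfl
      | cons b l => exact absurd ((h b).mpr (hy ▸ List.mem_cons_self)) (List.not_mem_nil)
    rw [this]
    rfl
  | some m =>
    cases hy : PySem.List.min? ys (fun x => x) with
    | none =>
      rw [PySem.List.min?_eq_none_iff] at hy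
      subst hy
      exact absurd ((h m).mp (PySem.List.min?_mem hx)) (List.not_mem_nil)
    | some m' =>
      have h1 := PySem.List.min?_isMin hx m' ((h m').mpr (PySem.List.min?_mem hy))
      have h2 := PySem.List.min?_isMin hy m ((h m).mp (PySem.List.min?_mem hx))
      simp only at h1 h2
      exact congrArg some (le_antisymm h1 h2)

theorem pvMax?_eq_of_mem_iff {xs ys : List Int} (h : ∀ a, a ∈ xs ↔ a ∈ ys) :
    PySem.List.max? xs (fun x => x) = PySem.List.max? ys (fun x => x) := by
  cases hx : PySem.List.max? xs (fun x => x) with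
  | none =>
    rw [PySem.List.max?_eq_none_iff] at hx
    subst hx
    have : ys = [] := by
      cases hy : ys with
      | nil => rfl
      | cons b l => exact absurd ((h b).mpr (hy ▸ List.mem_cons_self)) (List.not_mem_nil)
    rw [this]
    rfl
  | some m =>
    cases hy : PySem.List.max? ys (fun x => x) with
    | none =>
      rw [PySem.List.max?_eq_none_iff] at hy
      subst hy
      exact absurd ((h m).mp (PySem.List.max?_mem hx)) (List.not_mem_nil)
    | some m' =>
      have h1 := PySem.List.max?_isMax hx m' ((h m').mpr (PySem.List.max?_mem hy))
      have h2 := PySem.List.max?_isMax hy m ((h m).mp (PySem.List.max?_mem hx))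
      simp only at h1 h2
      exact congrArg some (le_antisymm h2 h1)

-- ---- bg equality ----
theorem pvSortedHead {α : Type} (xs : List α) (key : α → Int) :
    (PySem.List.sorted xs key true).head? = PySem.List.max? xs key := by
  induction xs using List.reverseRecOn with
  | nil => rfl
  | append_singleton xs x ih =>
    rw [show PySem.List.sorted (xs ++ [x]) key true =
        PySem.List.insertBy (fun a b => decide (key b < key a)) x (PySem.List.sorted xs key true)
      from by simp [PySem.List.sorted, List.foldl_append]]
    rw [show PySem.List.max? (xs ++ [x]) key =
        (match PySem.List.max? xs key with
          | none => some x
          | some m => if key m < key x then some x else some m)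
      from by
        simp only [PySem.List.max?, List.foldl_append, List.foldl_cons, List.foldl_nil]
        rfl]
    cases hs : PySem.List.sorted xs key true with
    | nil =>
      rw [hs] at ih
      rw [← ih]
      simp [PySem.List.insertBy]
    | cons a l =>
      rw [hs] at ih
      rw [← ih]
      simp only [List.head?_cons]
      by_cases hlt : key a < key x
      · simp [PySem.List.insertBy, hlt]
      · simp [PySem.List.insertBy, hlt]

theorem pvMax?_map {α β : Type} (f : β → α) (key : α → Int) (l : List β) :
    PySem.List.max? (l.map f) key = (PySem.List.max? l (fun b => key (f b))).map f := by
  suffices h : ∀ (acc : Option β),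
      List.foldl (fun acc x => match acc with
        | none => some x
        | some m => if key m < key x then some x else some m) (acc.map f) (l.map f) =
      (List.foldl (fun acc x => match acc with
        | none => some x
        | some m => if key (f m) < key (f x) then some x else some m) acc l).map f by
    exact h none
  induction l with
  | nil => intro acc; rfl
  | cons b l ih =>
    intro acc
    simp only [List.map_cons, List.foldl_cons]
    cases acc with
    | none => exact ih (some b)
    | some m =>
      by_cases hlt : key (f m) < key (f b)
      · simp only [Option.map_some, if_pos hlt]
        exact ih (some b)
      · simp only [Option.map_some, if_neg hlt]
        exact ih (some m)

theorem pvBg_eq (grid : List (List Int)) : pvBgA grid = pvBgB grid := by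
  have hc : grid.foldl (fun d row => row.foldl (fun d v => d.insert v (d.getD v 0 + 1)) d)
      (PySem.Dict.empty : PySem.Dict Int Int) = PySem.Dict.counter (grid.flatMap (fun row => row)) := by
    rw [← PySem.Dict.foldl_insert_getD_add_one_eq_counter, List.foldl_flatMap]
  show (if (PySem.Dict.counter (grid.flatMap (fun row => row))).size ≠ 0 then
      (PySem.List.pyGetD ((PySem.List.sorted
        (PySem.Dict.counter (grid.flatMap (fun row => row))).items
        (fun p => p.2) true).take 1) 0 (0, 0)).1
    else 0) =
    (if (grid.foldl (fun d row => row.foldl (fun d v => d.insert v (d.getD v 0 + 1)) d)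
        (PySem.Dict.empty : PySem.Dict Int Int)).size ≠ 0 then
      PySem.List.maxD (grid.foldl (fun d row => row.foldl (fun d v => d.insert v (d.getD v 0 + 1)) d)
        (PySem.Dict.empty : PySem.Dict Int Int)).keys
        (fun k => (grid.foldl (fun d row => row.foldl (fun d v => d.insert v (d.getD v 0 + 1)) d)
          (PySem.Dict.empty : PySem.Dict Int Int)).getD k 0) 0
    else 0)
  simp only [hc]
  by_cases hsz : (PySem.Dict.counter (grid.flatMap (fun row => row))).size ≠ 0
  · rw [if_pos hsz, if_pos hsz]
    have hitems := PySem.Dict.items_counter (grid.flatMap (fun row => row))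
    have hkeys := PySem.Dict.keys_counter (grid.flatMap (fun row => row))
    have hkey : (fun k => (PySem.Dict.counter (grid.flatMap (fun row => row))).getD k 0) =
        fun k => ((grid.flatMap (fun row => row)).count k : Int) :=
      funext (fun k => PySem.Dict.getD_counter _ k)
    have hne : PySem.Set.ofList (grid.flatMap (fun row => row)) ≠ [] := by
      intro hnil
      apply hsz
      have : (PySem.Dict.counter (grid.flatMap (fun row => row))).items = [] := by
        rw [hitems, hnil]; rfl
      simp only [PySem.Dict.size, this, List.length_nil]
    obtain ⟨k, hk⟩ : ∃ k, PySem.List.max? (PySem.Set.ofList (grid.flatMap (fun row => row)))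
        (fun k => ((grid.flatMap (fun row => row)).count k : Int)) = some k := by
      cases hmx : PySem.List.max? (PySem.Set.ofList (grid.flatMap (fun row => row)))
          (fun k => ((grid.flatMap (fun row => row)).count k : Int)) with
      | none => exact absurd ((PySem.List.max?_eq_none_iff _ _).mp hmx) hne
      | some m => exact ⟨m, rfl⟩
    have hmax : PySem.List.max? (PySem.Dict.counter (grid.flatMap (fun row => row))).items
        (fun p => p.2) = some (k, ((grid.flatMap (fun row => row)).count k : Int)) := by
      rw [hitems, pvMax?_map, hk]
      rfl
    have hhead := pvSortedHead (PySem.Dict.counter (grid.flatMap (fun row => row))).items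
      (fun p => p.2)
    rw [hmax] at hhead
    cases hsorted : PySem.List.sorted
        (PySem.Dict.counter (grid.flatMap (fun row => row))).items (fun p => p.2) true with
    | nil => rw [hsorted] at hhead; simp at hhead
    | cons h t =>
      rw [hsorted] at hhead
      simp only [List.head?_cons, Option.some.injEq] at hhead
      rw [List.take_succ_cons, List.take_zero, PySem.List.pyGetD_zero_cons, hhead]
      unfold PySem.List.maxD
      rw [hkeys, hkey, hk]
      rfl
  · rw [if_neg hsz, if_neg hsz]

-- ---- the row-major cell list ----
def pvCellsL (rows cols : Int) : List (Int × Int) :=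
  (PySem.List.pyRange 0 rows 1).flatMap (fun r =>
    (PySem.List.pyRange 0 cols 1).map (fun c => (r, c)))

theorem mem_pvCellsL {rows cols : Int} (p : Int × Int) :
    p ∈ pvCellsL rows cols ↔ pvInR rows cols p := by
  unfold pvCellsL pvInR
  obtain ⟨p1, p2⟩ := p
  simp only [List.mem_flatMap, List.mem_map, PySem.List.mem_pyRange_one, Prod.mk.injEq]
  constructor
  · rintro ⟨r, ⟨hr1, hr2⟩, c, ⟨hc1, hc2⟩, rfl, rfl⟩
    exact ⟨hr1, hr2, hc1, hc2⟩
  · rintro ⟨h1, h2, h3, h4⟩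
    exact ⟨p1, ⟨h1, h2⟩, p2, ⟨h3, h4⟩, rfl, rfl⟩

theorem length_pvCellsL (rows cols : Int) :
    (pvCellsL rows cols).length = rows.toNat * cols.toNat := by
  unfold pvCellsL
  rw [List.length_flatMap]
  simp [PySem.List.length_pyRange_one, List.map_const']

-- pairwise over a flatMap, generic
theorem pvPairwise_flatMap {α β : Type} (R : β → β → Prop) (f : α → List β) :
    ∀ (l : List α), (∀ a ∈ l, (f a).Pairwise R) →
      l.Pairwise (fun a b => ∀ x ∈ f a, ∀ y ∈ f b, R x y) →
      (l.flatMap f).Pairwise R := by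
  intro l
  induction l with
  | nil => intro _ _; simp
  | cons a t ih =>
    intro h1 h2
    rw [List.flatMap_cons, List.pairwise_append]
    obtain ⟨hrel, hpw⟩ := List.pairwise_cons.mp h2
    refine ⟨h1 a List.mem_cons_self, ih (fun b hb => h1 b (List.mem_cons_of_mem _ hb)) hpw, ?_⟩
    intro x hx y hy
    rcases List.mem_flatMap.mp hy with ⟨b, hb, hyb⟩
    exact hrel b hb x hx y hyb

theorem pvCellsL_pairwise (rows cols : Int) :
    (pvCellsL rows cols).Pairwise (fun a b => pvIdx cols a < pvIdx cols b) := by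
  unfold pvCellsL
  apply pvPairwise_flatMap
  · intro r _
    rw [List.pairwise_map]
    refine List.Pairwise.imp ?_ (PySem.List.pairwise_lt_pyRange_one 0 cols)
    intro a b hlt
    unfold pvIdx
    simp only
    linarith
  · refine List.Pairwise.imp ?_ (PySem.List.pairwise_lt_pyRange_one 0 rows)
    intro r1 r2 hlt x hx y hy
    rcases List.mem_map.mp hx with ⟨c1, hc1, rfl⟩
    rcases List.mem_map.mp hy with ⟨c2, hc2, rfl⟩
    rcases PySem.List.mem_pyRange_one.mp hc1 with ⟨hc1a, hc1b⟩
    rcases PySem.List.mem_pyRange_one.mp hc2 with ⟨hc2a, hc2b⟩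
    unfold pvIdx
    simp only
    nlinarith [mul_le_mul_of_nonneg_right (show r1 + 1 ≤ r2 by omega)
      (show (0:Int) ≤ cols by omega)]

-- nested row/column loops are one loop over the row-major cell list
theorem pvNestedFold {σ : Type} (rows cols : Int) (f : σ → Int → Int → σ) (init : σ) :
    (PySem.List.pyRange 0 rows 1).foldl (fun st r =>
      (PySem.List.pyRange 0 cols 1).foldl (fun st c => f st r c) st) init =
    (pvCellsL rows cols).foldl (fun st p => f st p.1 p.2) init := by
  unfold pvCellsL
  rw [List.foldl_flatMap]
  congr 1
  funext st r
  rw [List.foldl_map]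

-- A's loop body, named (definitionally the lambda appearing in the port)
def pvBodyA (grid : List (List Int)) (rows cols bg : Int)
    (st : List (List Bool) × List pvObj) (r c : Int) : List (List Bool) × List pvObj :=
  if ¬ pvVGet st.1 r c = true ∧ pvGridAt grid r c ≠ bg then
    let res := pvFlood grid rows cols (pvGridAt grid r c)
      (5 * (rows.toNat * cols.toNat) + 2) st.1 [(r, c)] []
    if res.1 ≠ [] then
      (res.2, st.2 ++ [(pvGridAt grid r c, res.1,
        ((PySem.List.min? (res.1.map (fun p => p.1)) (fun x => x)).getD 0,
         (PySem.List.min? (res.1.map (fun p => p.2)) (fun x => x)).getD 0,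
         (PySem.List.max? (res.1.map (fun p => p.1)) (fun x => x)).getD 0,
         (PySem.List.max? (res.1.map (fun p => p.2)) (fun x => x)).getD 0),
        PySem.List.len res.1)])
    else (res.2, st.2)
  else st

-- an object (color, cells, bbox, size) projected to B's box (min_r, min_c, max_r, max_c, color)
def pvObjToBox (o : pvObj) : Int × Int × Int × Int × Int :=
  (o.2.2.1.1, o.2.2.1.2.1, o.2.2.1.2.2.1, o.2.2.1.2.2.2, o.1)

def pvBoxOK (rows cols : Int) (b : Int × Int × Int × Int × Int) : Prop :=
  0 ≤ b.1 ∧ b.2.2.1 < rows ∧ 0 ≤ b.2.1 ∧ b.2.2.2.1 < cols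

theorem pvExtrBound (f : Int × Int → Int) (xs : List (Int × Int)) (hne : xs ≠ [])
    (P : Int → Prop) (h : ∀ p ∈ xs, P (f p)) :
    P ((PySem.List.min? (xs.map f) (fun x => x)).getD 0) ∧
    P ((PySem.List.max? (xs.map f) (fun x => x)).getD 0) := by
  constructor
  · cases hm : PySem.List.min? (xs.map f) (fun x => x) with
    | none =>
      rw [PySem.List.min?_eq_none_iff, List.map_eq_nil_iff] at hm
      exact absurd hm hne
    | some m =>
      rcases List.mem_map.mp (PySem.List.min?_mem hm) with ⟨p, hp, rfl⟩
      exact h p hp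
  · cases hm : PySem.List.max? (xs.map f) (fun x => x) with
    | none =>
      rw [PySem.List.max?_eq_none_iff, List.map_eq_nil_iff] at hm
      exact absurd hm hne
    | some m =>
      rcases List.mem_map.mp (PySem.List.max?_mem hm) with ⟨p, hp, rfl⟩
      exact h p hp

-- ---- absolute (visited-free) components ----
theorem pvNbrs_symm (p q : Int × Int) : p ∈ pvNbrs q ↔ q ∈ pvNbrs p := by
  obtain ⟨p1, p2⟩ := p
  obtain ⟨q1, q2⟩ := q
  simp only [pvNbrs, List.mem_cons, List.mem_singleton, List.not_mem_nil, or_false,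
    Prod.mk.injEq]
  omega

-- visited sets arising in A's scan are unions of whole components: closed under
-- same-color in-range adjacency
def pvClosedV (grid : List (List Int)) (rows cols : Int) (V : Int × Int → Prop) : Prop :=
  ∀ x, pvInR rows cols x → V x → ∀ y, y ∈ pvNbrs x → pvInR rows cols y →
    pvGridAt grid y.1 y.2 = pvGridAt grid x.1 x.2 → V y

-- for a closed visited set and an unvisited seed, avoiding-visited reach = absolute reach
theorem pvReachV_iff_abs {grid : List (List Int)} {rows cols color : Int}
    {V : Int × Int → Prop} (hcl : pvClosedV grid rows cols V) {s : Int × Int}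
    (hin : pvInR rows cols s) (hcol : pvGridAt grid s.1 s.2 = color) (hs : ¬ V s)
    (p : Int × Int) :
    pvReach grid rows cols color V s p ↔ pvReach grid rows cols color (fun _ => False) s p := by
  constructor
  · exact Relation.ReflTransGen.mono (fun a b hab => ⟨hab.1, hab.2.1, hab.2.2.1, fun hf => hf⟩)
  · intro h
    suffices hsuf : pvReach grid rows cols color V s p ∧ ¬ V p from hsuf.1
    induction h with
    | refl => exact ⟨Relation.ReflTransGen.refl, hs⟩
    | tail hq hstep ih =>
      rename_i q p'
      have hGFs : pvGood grid rows cols color (fun _ => False) s := ⟨hin, hcol, fun hf => hf⟩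
      have hgq := pvReach_good hGFs hq
      have hgp' := hstep.2
      have hnvp' : ¬ V p' := fun hV => ih.2 (hcl p' hgp'.1 hV q
        ((pvNbrs_symm p' q).mp hstep.1) hgq.1 (by rw [hgq.2.1, hgp'.2.1]))
      exact ⟨ih.1.tail ⟨hstep.1, hgp'.1, hgp'.2.1, hnvp'⟩, hnvp'⟩

-- the absolute component of s: cells reachable through cells of s's color
def pvComp (grid : List (List Int)) (rows cols : Int) (s p : Int × Int) : Prop :=
  pvReach grid rows cols (pvGridAt grid s.1 s.2) (fun _ => False) s p

theorem pvComp_refl {grid rows cols} (s : Int × Int) : pvComp grid rows cols s s :=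
  Relation.ReflTransGen.refl

theorem pvComp_good {grid rows cols} {s p : Int × Int} (hin : pvInR rows cols s)
    (h : pvComp grid rows cols s p) :
    pvGood grid rows cols (pvGridAt grid s.1 s.2) (fun _ => False) p :=
  pvReach_good ⟨hin, rfl, fun hf => hf⟩ h

theorem pvReach_false_rev {grid rows cols color} {s p : Int × Int}
    (hs : pvGood grid rows cols color (fun _ => False) s)
    (h : pvReach grid rows cols color (fun _ => False) s p) :
    pvReach grid rows cols color (fun _ => False) p s := by
  induction h with
  | refl => exact Relation.ReflTransGen.refl
  | tail hq hstep ih =>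
    rename_i q p'
    exact Relation.ReflTransGen.head
      ⟨(pvNbrs_symm p' q).mp hstep.1, pvReach_good hs hq⟩ ih

theorem pvComp_symm {grid rows cols} {s p : Int × Int} (hin : pvInR rows cols s)
    (h : pvComp grid rows cols s p) : pvComp grid rows cols p s := by
  have hgp := pvComp_good hin h
  show pvReach grid rows cols (pvGridAt grid p.1 p.2) (fun _ => False) p s
  rw [hgp.2.1]
  exact pvReach_false_rev ⟨hin, rfl, fun hf => hf⟩ h

theorem pvComp_trans {grid rows cols} {s p q : Int × Int} (hin : pvInR rows cols s)
    (h1 : pvComp grid rows cols s p) (h2 : pvComp grid rows cols p q) :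
    pvComp grid rows cols s q := by
  have hgp := pvComp_good hin h1
  unfold pvComp at h2
  rw [hgp.2.1] at h2
  exact Relation.ReflTransGen.trans h1 h2

theorem pvComp_step {grid rows cols} {s q : Int × Int} (hq : q ∈ pvNbrs s)
    (hinq : pvInR rows cols q) (hcq : pvGridAt grid q.1 q.2 = pvGridAt grid s.1 s.2) :
    pvComp grid rows cols s q :=
  Relation.ReflTransGen.single ⟨hq, hinq, hcq, fun hf => hf⟩

-- ---- min of a nonempty candidate list ----
theorem pvMinD_spec (x : Int) (t : List Int) :
    ((PySem.List.min? (x :: t) (fun y => y)).getD 0) ∈ (x :: t) ∧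
    ∀ y ∈ (x :: t), ((PySem.List.min? (x :: t) (fun y => y)).getD 0) ≤ y := by
  cases h : PySem.List.min? (x :: t) (fun y => y) with
  | none =>
    rw [PySem.List.min?_eq_none_iff] at h
    exact absurd h (List.cons_ne_nil x t)
  | some m =>
    simp only [Option.getD_some]
    exact ⟨PySem.List.min?_mem h, fun y hy => PySem.List.min?_isMin h y hy⟩

-- ---- the label matrix, pointwise ----
theorem pvMkM_at (rows cols : Int) (f : Int → Int → Int) {r c : Int}
    (h : pvInR rows cols (r, c)) : pvGridAt (pvMkM rows cols f) r c = f r c := by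
  obtain ⟨h1, h2, h3, h4⟩ := h
  simp only at h1 h2 h3 h4
  unfold pvGridAt pvMkM
  rw [PySem.List.pyGetD_map_pyRange_of_nonneg _ _ _ _ h1 h2]
  rw [PySem.List.pyGetD_map_pyRange_of_nonneg _ _ _ _ h3 h4]

theorem pvMkM_congr (rows cols : Int) (f g : Int → Int → Int)
    (h : ∀ r c, pvInR rows cols (r, c) → f r c = g r c) :
    pvMkM rows cols f = pvMkM rows cols g := by
  unfold pvMkM
  apply List.map_congr_left
  intro r hr
  apply List.map_congr_left
  intro c hc
  rcases PySem.List.mem_pyRange_one.mp hr with ⟨hr1, hr2⟩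
  rcases PySem.List.mem_pyRange_one.mp hc with ⟨hc1, hc2⟩
  exact h r c ⟨hr1, hr2, hc1, hc2⟩

theorem pvMkM_inj_at {rows cols : Int} {f g : Int → Int → Int}
    (h : pvMkM rows cols f = pvMkM rows cols g) {r c : Int}
    (hp : pvInR rows cols (r, c)) : f r c = g r c := by
  rw [← pvMkM_at rows cols f hp, h, pvMkM_at rows cols g hp]

-- one relaxation round on the function level
def pvFStep (grid : List (List Int)) (rows cols bg : Int) (f : Int → Int → Int)
    (r c : Int) : Int :=
  if pvGridAt grid r c ≠ bg then
    (PySem.List.min? (f r c ::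
      ((pvNbrs (r, c)).filter (fun q =>
        decide (0 ≤ q.1 ∧ q.1 < rows ∧ 0 ≤ q.2 ∧ q.2 < cols ∧
          pvGridAt grid q.1 q.2 = pvGridAt grid r c))).map (fun q => f q.1 q.2))
      (fun x => x)).getD 0
  else -1

theorem pvStepM_eq (grid : List (List Int)) (rows cols bg : Int) (f : Int → Int → Int) :
    pvStepM grid rows cols bg (pvMkM rows cols f) =
      pvMkM rows cols (pvFStep grid rows cols bg f) := by
  unfold pvStepM
  apply pvMkM_congr
  intro r c hin
  unfold pvFStep
  by_cases h : pvGridAt grid r c ≠ bg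
  · rw [if_pos h, if_pos h]
    have hl : pvCand grid rows cols (pvMkM rows cols f) r c = f r c ::
        ((pvNbrs (r, c)).filter (fun q =>
          decide (0 ≤ q.1 ∧ q.1 < rows ∧ 0 ≤ q.2 ∧ q.2 < cols ∧
            pvGridAt grid q.1 q.2 = pvGridAt grid r c))).map (fun q => f q.1 q.2) := by
      unfold pvCand
      rw [pvMkM_at rows cols f hin]
      congr 1
      apply List.map_congr_left
      intro q hq
      have hcond := of_decide_eq_true (List.mem_filter.mp hq).2
      exact pvMkM_at rows cols f ⟨hcond.1, hcond.2.1, hcond.2.2.1, hcond.2.2.2.1⟩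
    rw [hl]
  · rw [if_neg h, if_neg h]

-- the label invariant: bg cells hold -1, non-bg cells hold the index of some cell in
-- their component, bounded by their own index
def pvLInv (grid : List (List Int)) (rows cols bg : Int) (f : Int → Int → Int) : Prop :=
  ∀ p : Int × Int, pvInR rows cols p →
    (pvGridAt grid p.1 p.2 = bg → f p.1 p.2 = -1) ∧
    (pvGridAt grid p.1 p.2 ≠ bg →
      (∃ q, pvComp grid rows cols p q ∧ f p.1 p.2 = pvIdx cols q) ∧
      f p.1 p.2 ≤ pvIdx cols p)

theorem pvIdx_nonneg (rows cols : Int) (p : Int × Int) (h : pvInR rows cols p) :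
    0 ≤ pvIdx cols p := by
  obtain ⟨h1, h2, h3, h4⟩ := h
  unfold pvIdx
  have hm := mul_nonneg h1 (show (0:Int) ≤ cols by omega)
  linarith

theorem pvIdx_le (rows cols : Int) (p : Int × Int) (h : pvInR rows cols p) :
    pvIdx cols p ≤ rows * cols - 1 := by
  obtain ⟨h1, h2, h3, h4⟩ := h
  unfold pvIdx
  nlinarith [mul_le_mul_of_nonneg_right (show p.1 + 1 ≤ rows by omega)
    (show (0:Int) ≤ cols by omega)]

theorem pvIdx_inj (rows cols : Int) (p q : Int × Int) (hp : pvInR rows cols p)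
    (hq : pvInR rows cols q) (h : pvIdx cols p = pvIdx cols q) : p = q := by
  obtain ⟨a1, a2, a3, a4⟩ := hp
  obtain ⟨b1, b2, b3, b4⟩ := hq
  unfold pvIdx at h
  have hcols : (0:Int) < cols := by omega
  have h1 : p.1 = q.1 := by
    rcases lt_trichotomy p.1 q.1 with hlt | he | hgt
    · exfalso
      nlinarith [mul_le_mul_of_nonneg_right (show p.1 + 1 ≤ q.1 by omega) (le_of_lt hcols)]
    · exact he
    · exfalso
      nlinarith [mul_le_mul_of_nonneg_right (show q.1 + 1 ≤ p.1 by omega) (le_of_lt hcols)]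
  have h2 : p.2 = q.2 := by
    rw [h1] at h
    linarith
  exact Prod.ext_iff.mpr ⟨h1, h2⟩

theorem pvLInv_init (grid : List (List Int)) (rows cols bg : Int) :
    pvLInv grid rows cols bg
      (fun r c => if pvGridAt grid r c ≠ bg then pvIdx cols (r, c) else -1) := by
  intro p hp
  constructor
  · intro hbg
    show (if pvGridAt grid p.1 p.2 ≠ bg then pvIdx cols (p.1, p.2) else -1) = -1
    rw [if_neg (not_not_intro hbg)]
  · intro hnbg
    show (∃ q, pvComp grid rows cols p q ∧
        (if pvGridAt grid p.1 p.2 ≠ bg then pvIdx cols (p.1, p.2) else -1) = pvIdx cols q) ∧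
      (if pvGridAt grid p.1 p.2 ≠ bg then pvIdx cols (p.1, p.2) else -1) ≤ pvIdx cols p
    rw [if_pos hnbg]
    exact ⟨⟨p, pvComp_refl p, rfl⟩, le_refl _⟩

theorem pvFStep_le (grid : List (List Int)) (rows cols bg : Int) (f : Int → Int → Int)
    (hinv : pvLInv grid rows cols bg f) (p : Int × Int) (hp : pvInR rows cols p) :
    pvFStep grid rows cols bg f p.1 p.2 ≤ f p.1 p.2 := by
  unfold pvFStep
  by_cases h : pvGridAt grid p.1 p.2 ≠ bg
  · rw [if_pos h]
    exact (pvMinD_spec _ _).2 _ List.mem_cons_self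
  · rw [if_neg h]
    push_neg at h
    rw [(hinv p hp).1 h]

theorem pvFStep_inv (grid : List (List Int)) (rows cols bg : Int) (f : Int → Int → Int)
    (hinv : pvLInv grid rows cols bg f) :
    pvLInv grid rows cols bg (pvFStep grid rows cols bg f) := by
  intro p hp
  constructor
  · intro hbg
    unfold pvFStep
    rw [if_neg (by simpa using hbg)]
  · intro hnbg
    have hle : pvFStep grid rows cols bg f p.1 p.2 ≤ f p.1 p.2 :=
      pvFStep_le grid rows cols bg f hinv p hp
    have hlep : f p.1 p.2 ≤ pvIdx cols p := ((hinv p hp).2 hnbg).2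
    refine ⟨?_, by omega⟩
    unfold pvFStep
    rw [if_pos hnbg]
    have hmem := (pvMinD_spec (f p.1 p.2)
      (((pvNbrs (p.1, p.2)).filter (fun q =>
        decide (0 ≤ q.1 ∧ q.1 < rows ∧ 0 ≤ q.2 ∧ q.2 < cols ∧
          pvGridAt grid q.1 q.2 = pvGridAt grid p.1 p.2))).map (fun q => f q.1 q.2))).1
    rcases List.mem_cons.mp hmem with heq | hmem'
    · rw [heq]
      exact ((hinv p hp).2 hnbg).1
    · rcases List.mem_map.mp hmem' with ⟨y, hy, heq⟩
      obtain ⟨hynbr, hycond⟩ := List.mem_filter.mp hy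
      have hc := of_decide_eq_true hycond
      have hiny : pvInR rows cols y := ⟨hc.1, hc.2.1, hc.2.2.1, hc.2.2.2.1⟩
      have hcoly : pvGridAt grid y.1 y.2 = pvGridAt grid p.1 p.2 := hc.2.2.2.2
      have hnbgy : pvGridAt grid y.1 y.2 ≠ bg := by rw [hcoly]; exact hnbg
      obtain ⟨⟨q, hq, hfy⟩, -⟩ := (hinv y hiny).2 hnbgy
      refine ⟨q, ?_, by rw [← heq, hfy]⟩
      exact pvComp_trans hp (pvComp_step hynbr hiny hcoly) hq

-- ---- the measure: sum of label values, as naturals ----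
def pvMeas (rows cols : Int) (f : Int → Int → Int) : Nat :=
  ((pvCellsL rows cols).map (fun p => (f p.1 p.2).toNat)).sum

theorem pvSum_le_aux (l : List (Int × Int)) (f g : Int × Int → Int)
    (h : ∀ p ∈ l, g p ≤ f p) :
    (l.map (fun p => (g p).toNat)).sum ≤ (l.map (fun p => (f p).toNat)).sum := by
  induction l with
  | nil => simp
  | cons a t ih =>
    simp only [List.map_cons, List.sum_cons]
    have h1 : (g a).toNat ≤ (f a).toNat := by
      have := h a List.mem_cons_self
      omega
    have h2 := ih (fun p hp => h p (List.mem_cons_of_mem _ hp))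
    omega

theorem pvSum_lt_aux (l : List (Int × Int)) (f g : Int × Int → Int)
    (h : ∀ p ∈ l, g p ≤ f p) (hw : ∃ p ∈ l, 0 ≤ g p ∧ g p < f p) :
    (l.map (fun p => (g p).toNat)).sum < (l.map (fun p => (f p).toNat)).sum := by
  induction l with
  | nil => rcases hw with ⟨p, hp, -⟩; exact absurd hp (List.not_mem_nil)
  | cons a t ih =>
    simp only [List.map_cons, List.sum_cons]
    rcases hw with ⟨p, hp, h0, hlt⟩
    rcases List.mem_cons.mp hp with rfl | hpt
    · have h1 : (g p).toNat < (f p).toNat := by omega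
      have h2 := pvSum_le_aux t f g (fun x hx => h x (List.mem_cons_of_mem _ hx))
      omega
    · have h1 : (g a).toNat ≤ (f a).toNat := by
        have := h a List.mem_cons_self
        omega
      have h2 := ih (fun x hx => h x (List.mem_cons_of_mem _ hx)) ⟨p, hpt, h0, hlt⟩
      omega

-- the loop reaches a fixpoint whenever the fuel exceeds the measure
theorem pvIter_fix (grid : List (List Int)) (rows cols bg : Int) :
    ∀ (fuel : Nat) (f : Int → Int → Int), pvLInv grid rows cols bg f →
      pvMeas rows cols f < fuel →
      ∃ g, pvIterL grid rows cols bg fuel (pvMkM rows cols f) = pvMkM rows cols g ∧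
        pvLInv grid rows cols bg g ∧
        pvStepM grid rows cols bg (pvMkM rows cols g) = pvMkM rows cols g := by
  intro fuel
  induction fuel with
  | zero => intro f _ h; omega
  | succ n ih =>
    intro f hinv hm
    by_cases heq : pvStepM grid rows cols bg (pvMkM rows cols f) = pvMkM rows cols f
    · refine ⟨f, ?_, hinv, heq⟩
      simp only [pvIterL]
      rw [if_pos heq]
    · have hstep := pvStepM_eq grid rows cols bg f
      have hinv' := pvFStep_inv grid rows cols bg f hinv
      have hne : pvMkM rows cols (pvFStep grid rows cols bg f) ≠ pvMkM rows cols f := by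
        rw [← hstep]; exact heq
      have hex : ∃ p : Int × Int, pvInR rows cols p ∧
          0 ≤ pvFStep grid rows cols bg f p.1 p.2 ∧
          pvFStep grid rows cols bg f p.1 p.2 < f p.1 p.2 := by
        by_contra hno
        push_neg at hno
        apply hne
        apply pvMkM_congr
        intro r c hin
        have hle := pvFStep_le grid rows cols bg f hinv (r, c) hin
        by_cases hbg : pvGridAt grid r c = bg
        · have h1 : pvFStep grid rows cols bg f r c = -1 := by
            unfold pvFStep
            rw [if_neg (by simpa using hbg)]
          rw [h1, (hinv (r, c) hin).1 hbg]
        · obtain ⟨⟨q, hq, hfq⟩, -⟩ := (hinv' (r, c) hin).2 hbg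
          have h0 : 0 ≤ pvFStep grid rows cols bg f r c := by
            rw [hfq]
            exact pvIdx_nonneg rows cols q (pvComp_good hin hq).1
          have h3 := hno (r, c) hin h0
          exact le_antisymm hle h3
      obtain ⟨p, hinp, h0, hlt⟩ := hex
      have hmlt : pvMeas rows cols (pvFStep grid rows cols bg f) < pvMeas rows cols f := by
        unfold pvMeas
        exact pvSum_lt_aux (pvCellsL rows cols) (fun p => f p.1 p.2)
          (fun p => pvFStep grid rows cols bg f p.1 p.2)
          (fun q hq => pvFStep_le grid rows cols bg f hinv q ((mem_pvCellsL q).mp hq))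
          ⟨p, (mem_pvCellsL p).mpr hinp, h0, hlt⟩
      obtain ⟨g, hg1, hg2, hg3⟩ := ih (pvFStep grid rows cols bg f) hinv' (by omega)
      refine ⟨g, ?_, hg2, hg3⟩
      simp only [pvIterL]
      rw [if_neg heq, hstep]
      exact hg1

-- the converged labels, characterized: on a non-bg cell the label is the least
-- row-major index over the cell's component
theorem pvFix_le (grid : List (List Int)) (rows cols bg : Int) (g : Int → Int → Int)
    (hfix : pvStepM grid rows cols bg (pvMkM rows cols g) = pvMkM rows cols g)
    (p : Int × Int) (hp : pvInR rows cols p) (hnbg : pvGridAt grid p.1 p.2 ≠ bg)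
    (y : Int × Int) (hy : y ∈ pvNbrs p) (hiny : pvInR rows cols y)
    (hcoly : pvGridAt grid y.1 y.2 = pvGridAt grid p.1 p.2) :
    g p.1 p.2 ≤ g y.1 y.2 := by
  have h1 : pvFStep grid rows cols bg g p.1 p.2 = g p.1 p.2 :=
    pvMkM_inj_at (by rw [← pvStepM_eq grid rows cols bg g]; exact hfix) hp
  rw [← h1]
  unfold pvFStep
  rw [if_pos hnbg]
  have hmem : g y.1 y.2 ∈ (g p.1 p.2 ::
      ((pvNbrs (p.1, p.2)).filter (fun q =>
        decide (0 ≤ q.1 ∧ q.1 < rows ∧ 0 ≤ q.2 ∧ q.2 < cols ∧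
          pvGridAt grid q.1 q.2 = pvGridAt grid p.1 p.2))).map (fun q => g q.1 q.2)) := by
    apply List.mem_cons_of_mem
    exact List.mem_map.mpr ⟨y, List.mem_filter.mpr ⟨hy,
      decide_eq_true ⟨hiny.1, hiny.2.1, hiny.2.2.1, hiny.2.2.2, hcoly⟩⟩, rfl⟩
  exact (pvMinD_spec _ _).2 _ hmem

theorem pvFix_reach_le (grid : List (List Int)) (rows cols bg : Int) (g : Int → Int → Int)
    (hfix : pvStepM grid rows cols bg (pvMkM rows cols g) = pvMkM rows cols g)
    (p : Int × Int) (hp : pvInR rows cols p) (hnbg : pvGridAt grid p.1 p.2 ≠ bg) :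
    ∀ q, pvComp grid rows cols p q → g p.1 p.2 ≤ g q.1 q.2 := by
  intro q h
  induction h with
  | refl => exact le_refl _
  | tail hq hstep ih =>
    rename_i q' q''
    have hgq' := pvComp_good hp hq
    have hgq'' := hstep.2
    have hnbgq' : pvGridAt grid q'.1 q'.2 ≠ bg := by rw [hgq'.2.1]; exact hnbg
    have hle := pvFix_le grid rows cols bg g hfix q' hgq'.1 hnbgq' q'' hstep.1 hgq''.1
      (by rw [hgq''.2.1, hgq'.2.1])
    omega

theorem pvLabChar (grid : List (List Int)) (rows cols bg : Int) (g : Int → Int → Int)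
    (hinv : pvLInv grid rows cols bg g)
    (hfix : pvStepM grid rows cols bg (pvMkM rows cols g) = pvMkM rows cols g)
    (p : Int × Int) (hp : pvInR rows cols p) (hnbg : pvGridAt grid p.1 p.2 ≠ bg) :
    (∃ m, pvComp grid rows cols p m ∧ g p.1 p.2 = pvIdx cols m) ∧
    (∀ q, pvComp grid rows cols p q → g p.1 p.2 ≤ pvIdx cols q) ∧
    g p.1 p.2 ≤ pvIdx cols p := by
  obtain ⟨⟨m, hm, hgm⟩, hlep⟩ := (hinv p hp).2 hnbg
  refine ⟨⟨m, hm, hgm⟩, ?_, hlep⟩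
  intro q hq
  have hgq := pvComp_good hp hq
  have hnbgq : pvGridAt grid q.1 q.2 ≠ bg := by rw [hgq.2.1]; exact hnbg
  have h1 := pvFix_reach_le grid rows cols bg g hfix p hp hnbg q hq
  have h2 := ((hinv q hgq.1).2 hnbgq).2
  omega

theorem pvRepCond (grid : List (List Int)) (rows cols bg : Int) (g : Int → Int → Int)
    (hinv : pvLInv grid rows cols bg g)
    (hfix : pvStepM grid rows cols bg (pvMkM rows cols g) = pvMkM rows cols g)
    (x : Int × Int) (hx : pvInR rows cols x) (hnbg : pvGridAt grid x.1 x.2 ≠ bg) :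
    g x.1 x.2 = pvIdx cols x ↔
      ∀ q, pvComp grid rows cols x q → pvIdx cols x ≤ pvIdx cols q := by
  obtain ⟨⟨m, hm, hgm⟩, hle, hlex⟩ := pvLabChar grid rows cols bg g hinv hfix x hx hnbg
  constructor
  · intro h q hq
    rw [← h]
    exact hle q hq
  · intro h
    have h1 := h m hm
    omega

theorem pvRepCells (grid : List (List Int)) (rows cols bg : Int) (g : Int → Int → Int)
    (hinv : pvLInv grid rows cols bg g)
    (hfix : pvStepM grid rows cols bg (pvMkM rows cols g) = pvMkM rows cols g)
    (x : Int × Int) (hx : pvInR rows cols x) (hnbg : pvGridAt grid x.1 x.2 ≠ bg)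
    (hrep : g x.1 x.2 = pvIdx cols x) (q : Int × Int) :
    (pvInR rows cols q ∧ g q.1 q.2 = pvIdx cols x) ↔ pvComp grid rows cols x q := by
  constructor
  · rintro ⟨hinq, hgq⟩
    have hnbgq : pvGridAt grid q.1 q.2 ≠ bg := by
      intro hbgq
      have h1 := (hinv q hinq).1 hbgq
      have h2 := pvIdx_nonneg rows cols x hx
      omega
    obtain ⟨⟨m, hm, hgm⟩, -, -⟩ := pvLabChar grid rows cols bg g hinv hfix q hinq hnbgq
    have hinm : pvInR rows cols m := (pvComp_good hinq hm).1
    have hmx : m = x := pvIdx_inj rows cols m x hinm hx (by omega)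
    subst hmx
    exact pvComp_symm hinq hm
  · intro hcq
    have hgood := pvComp_good hx hcq
    have hinq := hgood.1
    refine ⟨hinq, ?_⟩
    have hnbgq : pvGridAt grid q.1 q.2 ≠ bg := by rw [hgood.2.1]; exact hnbg
    obtain ⟨⟨m, hm, hgm⟩, hle, -⟩ := pvLabChar grid rows cols bg g hinv hfix q hinq hnbgq
    have hqx : pvComp grid rows cols q x := pvComp_symm hx hcq
    have h1 : g q.1 q.2 ≤ pvIdx cols x := hle x hqx
    have hxm : pvComp grid rows cols x m := pvComp_trans hx hcq hm
    obtain ⟨-, hlex, -⟩ := pvLabChar grid rows cols bg g hinv hfix x hx hnbg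
    have h2 : g x.1 x.2 ≤ pvIdx cols m := hlex m hxm
    omega

theorem mem_pvCellsOf (rows cols : Int) (lab : List (List Int)) (t : Int) (q : Int × Int) :
    q ∈ pvCellsOf rows cols lab t ↔ pvInR rows cols q ∧ pvGridAt lab q.1 q.2 = t := by
  unfold pvCellsOf pvInR
  obtain ⟨q1, q2⟩ := q
  simp only [List.mem_flatMap, List.mem_map, List.mem_filter, PySem.List.mem_pyRange_one,
    decide_eq_true_eq, Prod.mk.injEq]
  constructor
  · rintro ⟨r, hr, c, ⟨⟨hc1, hc2⟩, hl⟩, rfl, rfl⟩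
    exact ⟨⟨hr.1, hr.2, hc1, hc2⟩, hl⟩
  · rintro ⟨⟨h1, h2, h3, h4⟩, hl⟩
    exact ⟨q1, ⟨h1, h2⟩, q2, ⟨⟨h3, h4⟩, hl⟩, rfl, rfl⟩

-- ---- the lockstep invariant between A's scan and B's representative scan ----
-- P is the prefix of row-major cells already processed
def pvInvL (grid : List (List Int)) (rows cols bg : Int) (P : List (Int × Int))
    (stA : List (List Bool) × List pvObj) (bx : List (Int × Int × Int × Int × Int)) : Prop :=
  pvShape stA.1 rows cols ∧
  pvClosedV grid rows cols (pvVTrue stA.1) ∧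
  (∀ p, pvInR rows cols p → (pvVTrue stA.1 p ↔
    (pvGridAt grid p.1 p.2 ≠ bg ∧ ∃ q ∈ P, pvComp grid rows cols p q))) ∧
  bx = stA.2.map pvObjToBox ∧ (∀ b ∈ bx, pvBoxOK rows cols b)

theorem pvLockStep (grid : List (List Int)) (rows cols bg : Int) (g : Int → Int → Int)
    (hinvg : pvLInv grid rows cols bg g)
    (hfix : pvStepM grid rows cols bg (pvMkM rows cols g) = pvMkM rows cols g)
    (x : Int × Int) (P rest : List (Int × Int))
    (hsplit : pvCellsL rows cols = P ++ x :: rest)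
    (stA : List (List Bool) × List pvObj) (bx : List (Int × Int × Int × Int × Int))
    (hI : pvInvL grid rows cols bg P stA bx) :
    pvInvL grid rows cols bg (P ++ [x])
      (pvBodyA grid rows cols bg stA x.1 x.2)
      (pvBodyB grid rows cols bg (pvMkM rows cols g) bx x.1 x.2) := by
  obtain ⟨hshape, hcl, hvt, hbx, hok⟩ := hI
  have hpw := pvCellsL_pairwise rows cols
  have hx : pvInR rows cols x := (mem_pvCellsL x).mp
    (by rw [hsplit]; exact List.mem_append_right _ List.mem_cons_self)
  rw [hsplit] at hpw
  have hPlt : ∀ q ∈ P, pvIdx cols q < pvIdx cols x := by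
    have := (List.pairwise_append.mp hpw).2.2
    exact fun q hq => this q hq x List.mem_cons_self
  have hrestgt : ∀ q ∈ rest, pvIdx cols x < pvIdx cols q :=
    (List.pairwise_cons.mp (List.pairwise_append.mp hpw).2.1).1
  have hPmem : ∀ q, pvInR rows cols q → pvIdx cols q < pvIdx cols x → q ∈ P := by
    intro q hq hlt
    have hmem : q ∈ P ++ x :: rest := by rw [← hsplit]; exact (mem_pvCellsL q).mpr hq
    rcases List.mem_append.mp hmem with h | h
    · exact h
    · rcases List.mem_cons.mp h with rfl | h
      · omega
      · have := hrestgt q h; omega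
  have hlabx : pvGridAt (pvMkM rows cols g) x.1 x.2 = g x.1 x.2 := pvMkM_at rows cols g hx
  have hcondiff : pvGridAt grid x.1 x.2 ≠ bg →
      (¬ pvVTrue stA.1 x ↔ g x.1 x.2 = pvIdx cols x) := by
    intro hnbg
    constructor
    · intro hnv
      refine (pvRepCond grid rows cols bg g hinvg hfix x hx hnbg).mpr ?_
      intro q hq
      by_contra hltq
      push_neg at hltq
      have hinq : pvInR rows cols q := (pvComp_good hx hq).1
      exact hnv ((hvt x hx).mpr ⟨hnbg, q, hPmem q hinq hltq, hq⟩)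
    · intro hrep hvtx
      obtain ⟨-, q, hqP, hq⟩ := (hvt x hx).mp hvtx
      have h1 := (pvRepCond grid rows cols bg g hinvg hfix x hx hnbg).mp hrep q hq
      have h2 := hPlt q hqP
      omega
  have hcondAB : (¬ pvVGet stA.1 x.1 x.2 = true ∧ pvGridAt grid x.1 x.2 ≠ bg) ↔
      (pvGridAt grid x.1 x.2 ≠ bg ∧
        pvGridAt (pvMkM rows cols g) x.1 x.2 = pvIdx cols (x.1, x.2)) := by
    rw [hlabx]
    constructor
    · rintro ⟨h1, h2⟩; exact ⟨h2, (hcondiff h2).mp h1⟩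
    · rintro ⟨h2, h1⟩; exact ⟨(hcondiff h2).mpr h1, h2⟩
  unfold pvBodyA pvBodyB
  by_cases hc : pvGridAt grid x.1 x.2 ≠ bg ∧
      pvGridAt (pvMkM rows cols g) x.1 x.2 = pvIdx cols (x.1, x.2)
  case neg =>
    rw [if_neg (fun h => hc (hcondAB.mp h)), if_neg hc]
    refine ⟨hshape, hcl, ?_, hbx, hok⟩
    intro p hp
    rw [hvt p hp]
    constructor
    · rintro ⟨h1, q, hqP, hq⟩
      exact ⟨h1, q, List.mem_append_left _ hqP, hq⟩
    · rintro ⟨h1, q, hq, hcomp⟩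
      rcases List.mem_append.mp hq with hq | hq
      · exact ⟨h1, q, hq, hcomp⟩
      · rcases List.mem_singleton.mp hq with rfl
        have hgx : pvGridAt grid q.1 q.2 = pvGridAt grid p.1 p.2 :=
          (pvComp_good hp hcomp).2.1
        have hnbgx : pvGridAt grid q.1 q.2 ≠ bg := by rw [hgx]; exact h1
        have hvtx : pvVTrue stA.1 q := by
          by_contra hnv
          exact hc ⟨hnbgx, by rw [hlabx]; exact (hcondiff hnbgx).mp hnv⟩
        obtain ⟨-, q', hq'P, hq'⟩ := (hvt q hx).mp hvtx
        exact ⟨h1, q', hq'P, pvComp_trans hp hcomp hq'⟩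
  case pos =>
    rw [if_pos (hcondAB.mpr hc), if_pos hc]
    have hnbg : pvGridAt grid x.1 x.2 ≠ bg := hc.1
    have hrep : g x.1 x.2 = pvIdx cols x := by rw [← hlabx]; exact hc.2
    have hnv : ¬ pvVTrue stA.1 x := (hcondiff hnbg).mpr hrep
    have hfuel : 5 * pvUnvis stA.1 + ([(x.1, x.2)] : List (Int × Int)).length <
        5 * (rows.toNat * cols.toNat) + 2 := by
      have := pvUnvis_le hshape
      simp only [List.length_cons, List.length_nil]
      omega
    obtain ⟨hshape', hvt', hmem'⟩ := pvFlood_spec grid rows cols (pvGridAt grid x.1 x.2)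
      (5 * (rows.toNat * cols.toNat) + 2) stA.1 [(x.1, x.2)] [] hshape hfuel
    have hgoodA : pvGood grid rows cols (pvGridAt grid x.1 x.2) (pvVTrue stA.1) (x.1, x.2) :=
      ⟨hx, rfl, hnv⟩
    have hRF : ∀ p, pvRF grid rows cols (pvGridAt grid x.1 x.2) (pvVTrue stA.1)
        [(x.1, x.2)] p ↔
        pvReach grid rows cols (pvGridAt grid x.1 x.2) (pvVTrue stA.1) (x.1, x.2) p := by
      intro p
      unfold pvRF
      constructor
      · rintro ⟨s, hs, -, hr⟩
        rcases List.mem_singleton.mp hs with rfl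
        exact hr
      · intro hr
        exact ⟨(x.1, x.2), List.mem_singleton.mpr rfl, hgoodA, hr⟩
    have habs : ∀ p, pvReach grid rows cols (pvGridAt grid x.1 x.2)
        (pvVTrue stA.1) (x.1, x.2) p ↔ pvComp grid rows cols x p := fun p =>
      pvReachV_iff_abs hcl hx rfl hnv p
    have hcells : ∀ p, p ∈ (pvFlood grid rows cols (pvGridAt grid x.1 x.2)
        (5 * (rows.toNat * cols.toNat) + 2) stA.1 [(x.1, x.2)] []).1 ↔
        pvComp grid rows cols x p := by
      intro p
      rw [hmem' p, hRF p, habs p]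
      simp
    have hseed : x ∈ (pvFlood grid rows cols (pvGridAt grid x.1 x.2)
        (5 * (rows.toNat * cols.toNat) + 2) stA.1 [(x.1, x.2)] []).1 :=
      (hcells x).mpr (pvComp_refl x)
    rw [if_pos (by intro h; rw [h] at hseed; exact absurd hseed (List.not_mem_nil))]
    have hBcells : ∀ q, q ∈ pvCellsOf rows cols (pvMkM rows cols g)
        (pvIdx cols (x.1, x.2)) ↔ pvComp grid rows cols x q := by
      intro q
      rw [mem_pvCellsOf]
      constructor
      · rintro ⟨hinq, hlq⟩
        rw [pvMkM_at rows cols g hinq] at hlq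
        exact (pvRepCells grid rows cols bg g hinvg hfix x hx hnbg hrep q).mp ⟨hinq, hlq⟩
      · intro hcq
        have hinq := (pvComp_good hx hcq).1
        refine ⟨hinq, ?_⟩
        rw [pvMkM_at rows cols g hinq]
        exact ((pvRepCells grid rows cols bg g hinvg hfix x hx hnbg hrep q).mpr hcq).2
    have hsets : ∀ p, p ∈ (pvFlood grid rows cols (pvGridAt grid x.1 x.2)
        (5 * (rows.toNat * cols.toNat) + 2) stA.1 [(x.1, x.2)] []).1 ↔
        p ∈ pvCellsOf rows cols (pvMkM rows cols g) (pvIdx cols (x.1, x.2)) := by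
      intro p
      rw [hcells p, hBcells p]
    have hfst : ∀ a, a ∈ ((pvFlood grid rows cols (pvGridAt grid x.1 x.2)
        (5 * (rows.toNat * cols.toNat) + 2) stA.1 [(x.1, x.2)] []).1.map (fun p => p.1)) ↔
        a ∈ ((pvCellsOf rows cols (pvMkM rows cols g) (pvIdx cols (x.1, x.2))).map
          (fun p => p.1)) := by
      intro a
      simp only [List.mem_map]
      constructor
      · rintro ⟨p, hp, rfl⟩; exact ⟨p, (hsets p).mp hp, rfl⟩
      · rintro ⟨p, hp, rfl⟩; exact ⟨p, (hsets p).mpr hp, rfl⟩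
    have hsnd : ∀ a, a ∈ ((pvFlood grid rows cols (pvGridAt grid x.1 x.2)
        (5 * (rows.toNat * cols.toNat) + 2) stA.1 [(x.1, x.2)] []).1.map (fun p => p.2)) ↔
        a ∈ ((pvCellsOf rows cols (pvMkM rows cols g) (pvIdx cols (x.1, x.2))).map
          (fun p => p.2)) := by
      intro a
      simp only [List.mem_map]
      constructor
      · rintro ⟨p, hp, rfl⟩; exact ⟨p, (hsets p).mp hp, rfl⟩
      · rintro ⟨p, hp, rfl⟩; exact ⟨p, (hsets p).mpr hp, rfl⟩
    have hmin1 := pvMin?_eq_of_mem_iff hfst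
    have hmin2 := pvMin?_eq_of_mem_iff hsnd
    have hmax1 := pvMax?_eq_of_mem_iff hfst
    have hmax2 := pvMax?_eq_of_mem_iff hsnd
    refine ⟨hshape', ?_, ?_, ?_, ?_⟩
    · -- closure of the enlarged visited set
      intro x0 hin0 hv0 y hy hiny hcoly
      have h0 := (hvt' x0 hin0).mp hv0
      rw [hRF x0, habs x0] at h0
      rcases h0 with h0 | h0
      · exact (hvt' y hiny).mpr (Or.inl (hcl x0 hin0 h0 y hy hiny hcoly))
      · have hgx0 := pvComp_good hx h0
        have hxy : pvComp grid rows cols x y :=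
          pvComp_trans hx h0 (pvComp_step hy hiny (by rw [hcoly, hgx0.2.1]))
        exact (hvt' y hiny).mpr (Or.inr ((hRF y).mpr ((habs y).mpr hxy)))
    · -- the visited set now covers the components of P ++ [x]
      intro p hp
      rw [hvt' p hp, hvt p hp, hRF p, habs p]
      constructor
      · rintro (⟨h1, q, hqP, hcq⟩ | hcxp)
        · exact ⟨h1, q, List.mem_append_left _ hqP, hcq⟩
        · have hgood := pvComp_good hx hcxp
          exact ⟨by rw [hgood.2.1]; exact hnbg, x,
            List.mem_append_right _ (List.mem_singleton.mpr rfl), pvComp_symm hx hcxp⟩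
      · rintro ⟨h1, q, hq, hcq⟩
        rcases List.mem_append.mp hq with hq | hq
        · exact Or.inl ⟨h1, q, hq, hcq⟩
        · rcases List.mem_singleton.mp hq with rfl
          exact Or.inr (pvComp_symm hp hcq)
    · -- the emitted boxes stay in lockstep
      simp only [List.map_append, List.map_cons, List.map_nil]
      rw [hbx]
      unfold pvObjToBox
      simp only [hmin1, hmin2, hmax1, hmax2]
    · -- every emitted box stays inside the grid
      intro b hb
      rcases List.mem_append.mp hb with hb | hb
      · exact hok b hb
      · rcases List.mem_singleton.mp hb with rfl
        have hnemp : pvCellsOf rows cols (pvMkM rows cols g) (pvIdx cols (x.1, x.2)) ≠ [] := by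
          intro h
          have := (hBcells x).mpr (pvComp_refl x)
          rw [h] at this
          exact absurd this (List.not_mem_nil)
        have hgoodmem : ∀ p, p ∈ pvCellsOf rows cols (pvMkM rows cols g)
            (pvIdx cols (x.1, x.2)) →
            pvGood grid rows cols (pvGridAt grid x.1 x.2) (fun _ => False) p :=
          fun p hp => pvComp_good hx ((hBcells p).mp hp)
        have hb1 := pvExtrBound (fun p => p.1) _ hnemp (fun v => 0 ≤ v)
          (fun p hp => (hgoodmem p hp).1.1)
        have hb2 := pvExtrBound (fun p => p.1) _ hnemp (fun v => v < rows)
          (fun p hp => (hgoodmem p hp).1.2.1)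
        have hb3 := pvExtrBound (fun p => p.2) _ hnemp (fun v => 0 ≤ v)
          (fun p hp => (hgoodmem p hp).1.2.2.1)
        have hb4 := pvExtrBound (fun p => p.2) _ hnemp (fun v => v < cols)
          (fun p hp => (hgoodmem p hp).1.2.2.2)
        exact ⟨hb1.1, hb2.2, hb3.1, hb4.2⟩

theorem pvLockAll (grid : List (List Int)) (rows cols bg : Int) (g : Int → Int → Int)
    (hinvg : pvLInv grid rows cols bg g)
    (hfix : pvStepM grid rows cols bg (pvMkM rows cols g) = pvMkM rows cols g) :
    ∀ (rest P : List (Int × Int)) (stA : List (List Bool) × List pvObj)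
      (bx : List (Int × Int × Int × Int × Int)),
      pvCellsL rows cols = P ++ rest → pvInvL grid rows cols bg P stA bx →
      pvInvL grid rows cols bg (pvCellsL rows cols)
        (rest.foldl (fun st p => pvBodyA grid rows cols bg st p.1 p.2) stA)
        (rest.foldl (fun b p => pvBodyB grid rows cols bg (pvMkM rows cols g) b p.1 p.2) bx) := by
  intro rest
  induction rest with
  | nil =>
    intro P stA bx hsplit hI
    have hP : P = pvCellsL rows cols := by rw [hsplit, List.append_nil]
    subst hP
    exact hI
  | cons x rest ih =>
    intro P stA bx hsplit hI
    simp only [List.foldl_cons]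
    exact ih (P ++ [x]) _ _ (by rw [hsplit, List.append_assoc]; rfl)
      (pvLockStep grid rows cols bg g hinvg hfix x P rest hsplit stA bx hI)

theorem pvVGet_init (rows cols : Int) (r c : Int) (hin : pvInR rows cols (r, c)) :
    pvVGet ((PySem.List.pyRange 0 rows 1).map (fun _ => List.replicate cols.toNat false)) r c
      = false := by
  obtain ⟨h1, h2, h3, h4⟩ := hin
  simp only at h1 h2 h3 h4
  have hlen : ((PySem.List.pyRange 0 rows 1).map
      (fun _ : Int => List.replicate cols.toNat false)).length = rows.toNat := by
    simp [PySem.List.length_pyRange_one]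
  unfold pvVGet
  rw [PySem.List.pyGetD_eq_getElem _ [] h1 (by rw [hlen]; omega)]
  rw [List.getElem_map]
  rw [PySem.List.pyGetD_eq_getElem _ false h3 (by rw [List.length_replicate]; omega)]
  exact List.getElem_replicate _

theorem pvScan_eq (grid : List (List Int)) (rows cols bg : Int) (g : Int → Int → Int)
    (hinvg : pvLInv grid rows cols bg g)
    (hfix : pvStepM grid rows cols bg (pvMkM rows cols g) = pvMkM rows cols g) :
    pvScanB grid rows cols bg (pvMkM rows cols g) =
      (pvScanA grid rows cols bg).2.map pvObjToBox ∧
    ∀ b ∈ pvScanB grid rows cols bg (pvMkM rows cols g), pvBoxOK rows cols b := by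
  have hA : pvScanA grid rows cols bg = (pvCellsL rows cols).foldl
      (fun st p => pvBodyA grid rows cols bg st p.1 p.2)
      ((PySem.List.pyRange 0 rows 1).map (fun _ => List.replicate cols.toNat false), []) := by
    show (PySem.List.pyRange 0 rows 1).foldl (fun st r =>
        (PySem.List.pyRange 0 cols 1).foldl (fun st c => pvBodyA grid rows cols bg st r c) st)
        ((PySem.List.pyRange 0 rows 1).map (fun _ => List.replicate cols.toNat false), []) = _
    exact pvNestedFold rows cols (pvBodyA grid rows cols bg) _
  have hB : pvScanB grid rows cols bg (pvMkM rows cols g) = (pvCellsL rows cols).foldl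
      (fun b p => pvBodyB grid rows cols bg (pvMkM rows cols g) b p.1 p.2) [] :=
    pvNestedFold rows cols (pvBodyB grid rows cols bg (pvMkM rows cols g)) []
  have hinit : pvInvL grid rows cols bg []
      ((PySem.List.pyRange 0 rows 1).map (fun _ => List.replicate cols.toNat false), [])
      [] := by
    refine ⟨pvShape_init rows cols, ?_, ?_, rfl, fun b hb => absurd hb (List.not_mem_nil)⟩
    · intro x hin hvx
      exfalso
      obtain ⟨x1, x2⟩ := x
      simp only [pvVTrue, pvVGet_init rows cols x1 x2 hin] at hvx
      exact Bool.false_ne_true hvx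
    · intro p hp
      obtain ⟨p1, p2⟩ := p
      simp only [pvVTrue, pvVGet_init rows cols p1 p2 hp]
      simp
  have hrel := pvLockAll grid rows cols bg g hinvg hfix (pvCellsL rows cols) [] _ []
    (by simp) hinit
  rw [hA, hB]
  exact ⟨hrel.2.2.2.1, hrel.2.2.2.2⟩

-- ---- the fill ----
-- proof-side: the value of a cell determined by a (bbox, color) list, later boxes winning
def pvCell (boxes : List (Int × Int × Int × Int × Int)) (bg r c : Int) : Int :=
  boxes.foldl (fun v b =>
    if b.1 ≤ r ∧ r ≤ b.2.2.1 ∧ b.2.1 ≤ c ∧ c ≤ b.2.2.2.1 then b.2.2.2.2 else v) bg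

theorem pvGetD_nonneg {α : Type} (xs : List α) (i : Int) (d : α) (h : 0 ≤ i) :
    PySem.List.pyGetD xs i d = xs.getD i.toNat d := by
  have he : i = ((i.toNat : Nat) : Int) := (Int.toNat_of_nonneg h).symm
  conv_lhs => rw [he]
  rw [PySem.List.pyGetD_natCast]

-- filling one row segment, pointwise
theorem pvRowFill (color : Int) : ∀ (cs : List Int), (∀ c ∈ cs, 0 ≤ c) → ∀ (row : List Int),
    ((cs.foldl (fun row c => PySem.List.pySetD row c color) row).length = row.length ∧
     ∀ (j : Nat), j < row.length →
      (cs.foldl (fun row c => PySem.List.pySetD row c color) row).getD j 0 =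
        if (j : Int) ∈ cs then color else row.getD j 0) := by
  intro cs
  induction cs with
  | nil => intro _ row; exact ⟨rfl, fun j hj => by simp⟩
  | cons c cs ih =>
    intro hcs row
    have hc := hcs c List.mem_cons_self
    simp only [List.foldl_cons]
    obtain ⟨ihl, ihp⟩ := ih (fun x hx => hcs x (List.mem_cons_of_mem _ hx))
      (PySem.List.pySetD row c color)
    constructor
    · rw [ihl, PySem.List.length_pySetD]
    · intro j hj
      rw [ihp j (by rw [PySem.List.length_pySetD]; exact hj)]
      rw [PySem.List.pySetD_of_nonneg _ _ hc]
      by_cases hjc : (j : Int) = c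
      · rw [if_pos (List.mem_cons.mpr (Or.inl hjc))]
        by_cases hmem : ((j : Int)) ∈ cs
        · rw [if_pos hmem]
        · rw [if_neg hmem]
          rw [List.getD_eq_getElem _ _ (by rw [List.length_set]; exact hj)]
          have hj' : j = c.toNat := by omega
          subst hj'
          exact List.getElem_set_self _
      · have hrow : (row.set c.toNat color).getD j 0 = row.getD j 0 := by
          rw [List.getD_eq_getElem _ _ (by rw [List.length_set]; exact hj),
            List.getD_eq_getElem _ _ hj]
          exact List.getElem_set_ne (by omega) _
        rw [hrow]
        by_cases hmem : ((j : Int)) ∈ cs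
        · rw [if_pos hmem, if_pos (List.mem_cons.mpr (Or.inr hmem))]
        · rw [if_neg hmem, if_neg (by simp [hjc, hmem])]

-- the inner column loop only rewrites row r
theorem pvColLoop (color : Int) (r : Int) (hr : 0 ≤ r) : ∀ (cs : List Int) (M : List (List Int)),
    cs.foldl (fun result c => PySem.List.pySetD result r
      (PySem.List.pySetD (PySem.List.pyGetD result r []) c color)) M
    = PySem.List.pySetD M r (cs.foldl (fun row c => PySem.List.pySetD row c color)
        (PySem.List.pyGetD M r [])) := by
  intro cs
  induction cs with
  | nil =>
    intro M
    simp only [List.foldl_nil]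
    rw [PySem.List.pySetD_of_nonneg _ _ hr, pvGetD_nonneg _ _ _ hr]
    by_cases hlen : r.toNat < M.length
    · rw [List.getD_eq_getElem _ _ hlen]
      exact (List.set_getElem_self hlen).symm
    · rw [List.set_eq_of_length_le (by omega)]
  | cons c cs ih =>
    intro M
    simp only [List.foldl_cons]
    rw [ih]
    by_cases hlen : r.toNat < M.length
    · have hget : PySem.List.pyGetD (PySem.List.pySetD M r
          (PySem.List.pySetD (PySem.List.pyGetD M r []) c color)) r [] =
          PySem.List.pySetD (PySem.List.pyGetD M r []) c color := by
        rw [PySem.List.pySetD_of_nonneg _ _ hr, pvGetD_nonneg _ _ _ hr,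
          List.getD_eq_getElem _ _ (by rw [List.length_set]; exact hlen)]
        exact List.getElem_set_self _
      rw [hget]
      rw [PySem.List.pySetD_of_nonneg _ _ hr, PySem.List.pySetD_of_nonneg _ _ hr,
        PySem.List.pySetD_of_nonneg _ _ hr, List.set_set]
    · have hnoop : ∀ (w : List Int), PySem.List.pySetD M r w = M := by
        intro w
        rw [PySem.List.pySetD_of_nonneg _ _ hr]
        exact List.set_eq_of_length_le (by omega)
      rw [hnoop, hnoop, hnoop]

-- the outer row loop, pointwise (rs without duplicates, all nonnegative)
theorem pvRowLoop (g : List Int → List Int) : ∀ (rs : List Int), (∀ r ∈ rs, 0 ≤ r) → rs.Nodup →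
    ∀ (M : List (List Int)),
    ((rs.foldl (fun M r => PySem.List.pySetD M r (g (PySem.List.pyGetD M r []))) M).length
        = M.length ∧
     ∀ (j : Nat), j < M.length →
      (rs.foldl (fun M r => PySem.List.pySetD M r (g (PySem.List.pyGetD M r []))) M).getD j [] =
        if (j : Int) ∈ rs then g (M.getD j []) else M.getD j []) := by
  intro rs
  induction rs with
  | nil => intro _ _ M; exact ⟨rfl, fun j hj => by simp⟩
  | cons r rs ih =>
    intro hrs hnd M
    have hr := hrs r List.mem_cons_self
    simp only [List.foldl_cons]
    obtain ⟨ihl, ihp⟩ := ih (fun x hx => hrs x (List.mem_cons_of_mem _ hx))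
      (List.nodup_cons.mp hnd).2 (PySem.List.pySetD M r (g (PySem.List.pyGetD M r [])))
    have hrnotin := (List.nodup_cons.mp hnd).1
    constructor
    · rw [ihl, PySem.List.length_pySetD]
    · intro j hj
      rw [ihp j (by rw [PySem.List.length_pySetD]; exact hj)]
      rw [PySem.List.pySetD_of_nonneg _ _ hr, pvGetD_nonneg _ _ _ hr]
      by_cases hjr : (j : Int) = r
      · have hmem : ¬ ((j : Int)) ∈ rs := fun hm => hrnotin (hjr ▸ hm)
        rw [if_neg hmem, if_pos (List.mem_cons.mpr (Or.inl hjr))]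
        rw [List.getD_eq_getElem _ _ (by rw [List.length_set]; exact hj)]
        have hj' : j = r.toNat := by omega
        subst hj'
        rw [List.getElem_set_self _]
      · have hrow : (M.set r.toNat (g (M.getD r.toNat []))).getD j [] = M.getD j [] := by
          rw [List.getD_eq_getElem _ _ (by rw [List.length_set]; exact hj),
            List.getD_eq_getElem _ _ hj]
          exact List.getElem_set_ne (by omega) _
        rw [hrow]
        by_cases hmem : ((j : Int)) ∈ rs
        · rw [if_pos hmem, if_pos (List.mem_cons.mpr (Or.inr hmem))]
        · rw [if_neg hmem, if_neg (by simp [hjr, hmem])]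

def pvMatrixOf (rows cols bg : Int) (boxes : List (Int × Int × Int × Int × Int)) :
    List (List Int) :=
  (PySem.List.pyRange 0 rows 1).map (fun r =>
    (PySem.List.pyRange 0 cols 1).map (fun c => pvCell boxes bg r c))

theorem pvMatrixOf_length (rows cols bg : Int) (boxes : List (Int × Int × Int × Int × Int)) :
    (pvMatrixOf rows cols bg boxes).length = rows.toNat := by
  unfold pvMatrixOf
  simp [PySem.List.length_pyRange_one]

theorem pvMatrixOf_getD (rows cols bg : Int) (boxes : List (Int × Int × Int × Int × Int))
    (j : Nat) (hj : j < rows.toNat) :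
    (pvMatrixOf rows cols bg boxes).getD j [] =
      (PySem.List.pyRange 0 cols 1).map (fun c => pvCell boxes bg (j : Int) c) := by
  unfold pvMatrixOf
  rw [List.getD_eq_getElem _ _ (by simp [PySem.List.length_pyRange_one]; omega)]
  rw [List.getElem_map]
  simp only [PySem.List.getElem_pyRange_one, zero_add]

theorem pvRowOf_getD (cols bg : Int) (boxes : List (Int × Int × Int × Int × Int)) (r : Int)
    (k : Nat) (hk : k < cols.toNat) :
    (((PySem.List.pyRange 0 cols 1).map (fun c => pvCell boxes bg r c)).getD k 0) =
      pvCell boxes bg r (k : Int) := by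
  rw [List.getD_eq_getElem _ _ (by simp [PySem.List.length_pyRange_one]; omega)]
  rw [List.getElem_map]
  simp only [PySem.List.getElem_pyRange_one, zero_add]

theorem pvCell_append (boxes : List (Int × Int × Int × Int × Int))
    (b : Int × Int × Int × Int × Int) (bg r c : Int) :
    pvCell (boxes ++ [b]) bg r c =
      if b.1 ≤ r ∧ r ≤ b.2.2.1 ∧ b.2.1 ≤ c ∧ c ≤ b.2.2.2.1 then b.2.2.2.2
      else pvCell boxes bg r c := by
  unfold pvCell
  rw [List.foldl_append]
  rfl

-- filling one bounding box on a matrix of cell values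
theorem pvFillOne (rows cols bg : Int) (boxes0 : List (Int × Int × Int × Int × Int))
    (b : Int × Int × Int × Int × Int) (hok : pvBoxOK rows cols b) :
    (PySem.List.pyRange b.1 (b.2.2.1 + 1) 1).foldl (fun result r =>
      (PySem.List.pyRange b.2.1 (b.2.2.2.1 + 1) 1).foldl (fun result c =>
        PySem.List.pySetD result r
          (PySem.List.pySetD (PySem.List.pyGetD result r []) c b.2.2.2.2)) result)
      (pvMatrixOf rows cols bg boxes0) = pvMatrixOf rows cols bg (boxes0 ++ [b]) := by
  obtain ⟨hb1, hb2, hb3, hb4⟩ := hok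
  have hre : (PySem.List.pyRange b.1 (b.2.2.1 + 1) 1).foldl (fun result r =>
      (PySem.List.pyRange b.2.1 (b.2.2.2.1 + 1) 1).foldl (fun result c =>
        PySem.List.pySetD result r
          (PySem.List.pySetD (PySem.List.pyGetD result r []) c b.2.2.2.2)) result)
      (pvMatrixOf rows cols bg boxes0) =
    (PySem.List.pyRange b.1 (b.2.2.1 + 1) 1).foldl (fun M r =>
      PySem.List.pySetD M r ((PySem.List.pyRange b.2.1 (b.2.2.2.1 + 1) 1).foldl
        (fun row c => PySem.List.pySetD row c b.2.2.2.2) (PySem.List.pyGetD M r [])))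
      (pvMatrixOf rows cols bg boxes0) := by
    apply PySem.List.foldl_congr_mem
    intro acc x hx
    have hx0 : 0 ≤ x := by
      rcases (PySem.List.mem_pyRange_one).mp hx with ⟨h, _⟩
      omega
    exact pvColLoop b.2.2.2.2 x hx0 _ acc
  rw [hre]
  obtain ⟨hlen, hpt⟩ := pvRowLoop
    (fun row => (PySem.List.pyRange b.2.1 (b.2.2.2.1 + 1) 1).foldl
      (fun row c => PySem.List.pySetD row c b.2.2.2.2) row)
    (PySem.List.pyRange b.1 (b.2.2.1 + 1) 1)
    (fun r hr => by rcases (PySem.List.mem_pyRange_one).mp hr with ⟨h, _⟩; omega)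
    (PySem.List.nodup_pyRange_one _ _)
    (pvMatrixOf rows cols bg boxes0)
  have hcnn : ∀ c ∈ PySem.List.pyRange b.2.1 (b.2.2.2.1 + 1) 1, 0 ≤ c := by
    intro c hc
    rcases (PySem.List.mem_pyRange_one).mp hc with ⟨h, _⟩
    omega
  apply List.ext_getElem
  · rw [hlen, pvMatrixOf_length, pvMatrixOf_length]
  · intro j hjl hjr
    have hj : j < rows.toNat := by rw [pvMatrixOf_length] at hjr; exact hjr
    have hjl' : j < (pvMatrixOf rows cols bg boxes0).length := by
      rw [pvMatrixOf_length]; exact hj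
    rw [← List.getD_eq_getElem _ [] hjl, ← List.getD_eq_getElem _ [] hjr]
    rw [hpt j hjl']
    rw [pvMatrixOf_getD _ _ _ _ _ hj, pvMatrixOf_getD _ _ _ _ _ hj]
    by_cases hjin : (j : Int) ∈ PySem.List.pyRange b.1 (b.2.2.1 + 1) 1
    · rw [if_pos hjin]
      rcases (PySem.List.mem_pyRange_one).mp hjin with ⟨hr1, hr2⟩
      obtain ⟨hrlen, hrpt⟩ := pvRowFill b.2.2.2.2 _ hcnn
        ((PySem.List.pyRange 0 cols 1).map (fun c => pvCell boxes0 bg (j : Int) c))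
      apply List.ext_getElem
      · rw [hrlen]; simp [PySem.List.length_pyRange_one]
      · intro k hkl hkr
        have hk : k < cols.toNat := by
          simp [PySem.List.length_pyRange_one] at hkr; omega
        have hkl' : k < ((PySem.List.pyRange 0 cols 1).map
            (fun c => pvCell boxes0 bg (j : Int) c)).length := by
          simp [PySem.List.length_pyRange_one]; omega
        rw [← List.getD_eq_getElem _ 0 hkl, ← List.getD_eq_getElem _ 0 hkr]
        rw [hrpt k (by simpa [PySem.List.length_pyRange_one] using hk)]
        rw [pvRowOf_getD _ _ _ _ _ hk, pvRowOf_getD _ _ _ _ _ hk]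
        rw [pvCell_append]
        by_cases hkin : (k : Int) ∈ PySem.List.pyRange b.2.1 (b.2.2.2.1 + 1) 1
        · rcases (PySem.List.mem_pyRange_one).mp hkin with ⟨hc1, hc2⟩
          rw [if_pos hkin, if_pos ⟨hr1, by omega, hc1, by omega⟩]
        · rw [if_neg hkin, if_neg ?_]
          rw [PySem.List.mem_pyRange_one] at hkin
          rintro ⟨-, -, g3, g4⟩
          exact hkin ⟨g3, by omega⟩
    · rw [if_neg hjin]
      rw [PySem.List.mem_pyRange_one] at hjin
      apply List.ext_getElem
      · simp
      · intro k hkl hkr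
        have hk : k < cols.toNat := by
          simp [PySem.List.length_pyRange_one] at hkr; omega
        rw [← List.getD_eq_getElem _ 0 hkl, ← List.getD_eq_getElem _ 0 hkr]
        rw [pvRowOf_getD _ _ _ _ _ hk, pvRowOf_getD _ _ _ _ _ hk]
        rw [pvCell_append]
        rw [if_neg ?_]
        rintro ⟨g1, g2, -, -⟩
        exact hjin ⟨g1, by omega⟩

theorem pvFoldNilPreserve {α : Type} (f : List (List Int) → α → List (List Int))
    (hf : ∀ a, f [] a = []) : ∀ (l : List α), l.foldl f [] = [] := by
  intro l
  induction l with
  | nil => rfl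
  | cons a l ih => simp only [List.foldl_cons, hf a]; exact ih

theorem pvFill_eq (grid : List (List Int)) (rows cols bg : Int)
    (objs : List pvObj) (boxes : List (Int × Int × Int × Int × Int))
    (hb : boxes = objs.map pvObjToBox) (hok : ∀ b ∈ boxes, pvBoxOK rows cols b)
    (hrows : rows = PySem.List.len grid)
    (hcols : cols = if grid ≠ [] then PySem.List.len (PySem.List.pyGetD grid 0 []) else 0) :
    objs.foldl (fun result obj =>
      (PySem.List.pyRange obj.2.2.1.1 (obj.2.2.1.2.2.1 + 1) 1).foldl (fun result r =>
        (PySem.List.pyRange obj.2.2.1.2.1 (obj.2.2.1.2.2.2 + 1) 1).foldl (fun result c =>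
          PySem.List.pySetD result r
            (PySem.List.pySetD (PySem.List.pyGetD result r []) c obj.1)) result) result)
      ((PySem.List.pyRange 0 rows 1).map
        (fun _ => List.replicate (PySem.List.pyGetD grid 0 []).length bg)) =
    (PySem.List.pyRange 0 rows 1).map (fun r =>
      (PySem.List.pyRange 0 cols 1).map (fun c => pvCell boxes bg r c)) := by
  subst hb
  have hsetnil : ∀ (i : Int) (w : List Int), PySem.List.pySetD ([] : List (List Int)) i w = [] :=
    fun i w => List.eq_nil_of_length_eq_zero (by rw [PySem.List.length_pySetD]; rfl)
  by_cases hg : grid = []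
  · subst hg
    have hr0 : rows = 0 := by rw [hrows]; rfl
    subst hr0
    rw [show PySem.List.pyRange 0 0 1 = [] from PySem.List.pyRange_one_eq_nil le_rfl]
    simp only [List.map_nil]
    apply pvFoldNilPreserve
    intro o
    apply pvFoldNilPreserve
    intro r
    apply pvFoldNilPreserve
    intro c
    exact hsetnil _ _
  · have hw : cols = ((PySem.List.pyGetD grid 0 []).length : Int) := by
      rw [hcols, if_pos hg, PySem.List.len_eq]
    have hM0 : (PySem.List.pyRange 0 rows 1).map
        (fun _ => List.replicate (PySem.List.pyGetD grid 0 []).length bg) =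
        pvMatrixOf rows cols bg [] := by
      unfold pvMatrixOf
      apply List.map_congr_left
      intro a _
      have : (PySem.List.pyRange 0 cols 1).map (fun c => pvCell [] bg a c) =
          (PySem.List.pyRange 0 cols 1).map (fun _ => bg) := rfl
      rw [this, List.map_const']
      rw [PySem.List.length_pyRange_one]
      congr 1
      omega
    rw [hM0]
    have main : ∀ (objs : List pvObj) (boxes0 : List (Int × Int × Int × Int × Int)),
        (∀ o ∈ objs, pvBoxOK rows cols (pvObjToBox o)) →
        objs.foldl (fun result obj =>
          (PySem.List.pyRange obj.2.2.1.1 (obj.2.2.1.2.2.1 + 1) 1).foldl (fun result r =>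
            (PySem.List.pyRange obj.2.2.1.2.1 (obj.2.2.1.2.2.2 + 1) 1).foldl (fun result c =>
              PySem.List.pySetD result r
                (PySem.List.pySetD (PySem.List.pyGetD result r []) c obj.1)) result) result)
          (pvMatrixOf rows cols bg boxes0) =
        pvMatrixOf rows cols bg (boxes0 ++ objs.map pvObjToBox) := by
      intro objs
      induction objs with
      | nil => intro boxes0 _; simp
      | cons o objs ih =>
        intro boxes0 hoks
        simp only [List.foldl_cons]
        rw [show (PySem.List.pyRange o.2.2.1.1 (o.2.2.1.2.2.1 + 1) 1).foldl (fun result r =>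
            (PySem.List.pyRange o.2.2.1.2.1 (o.2.2.1.2.2.2 + 1) 1).foldl (fun result c =>
              PySem.List.pySetD result r
                (PySem.List.pySetD (PySem.List.pyGetD result r []) c o.1)) result)
            (pvMatrixOf rows cols bg boxes0) = pvMatrixOf rows cols bg (boxes0 ++ [pvObjToBox o])
          from pvFillOne rows cols bg boxes0 (pvObjToBox o) (hoks o List.mem_cons_self)]
        rw [ih (boxes0 ++ [pvObjToBox o]) (fun x hx => hoks x (List.mem_cons_of_mem _ hx))]
        rw [List.append_assoc]
        rfl
    have hoks : ∀ o ∈ objs, pvBoxOK rows cols (pvObjToBox o) := by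
      intro o ho
      exact hok _ (List.mem_map.mpr ⟨o, ho, rfl⟩)
    rw [main objs [] hoks]
    rfl

-- ---- the painted dict agrees with pvCell ----
theorem pvDictRowFill (color : Int) (r : Int) :
    ∀ (cs : List Int) (d : PySem.Dict (Int × Int) Int) (k : Int × Int) (dflt : Int),
      (cs.foldl (fun d c => d.insert (r, c) color) d).getD k dflt =
        if k.1 = r ∧ k.2 ∈ cs then color else d.getD k dflt := by
  intro cs
  induction cs with
  | nil => intro d k dflt; simp
  | cons c cs ih =>
    intro d k dflt
    obtain ⟨k1, k2⟩ := k
    simp only [List.foldl_cons]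
    rw [ih, PySem.Dict.getD_insert]
    by_cases h1 : k1 = r <;> by_cases h3 : k2 = c <;> by_cases h2 : k2 ∈ cs <;>
      simp [h1, h3, h2, Prod.ext_iff, List.mem_cons]

theorem pvDictBoxFill (color : Int) :
    ∀ (rs : List Int) (cs : List Int) (d : PySem.Dict (Int × Int) Int) (k : Int × Int)
      (dflt : Int),
      (rs.foldl (fun d r => cs.foldl (fun d c => d.insert (r, c) color) d) d).getD k dflt =
        if k.1 ∈ rs ∧ k.2 ∈ cs then color else d.getD k dflt := by
  intro rs
  induction rs with
  | nil => intro cs d k dflt; simp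
  | cons r rs ih =>
    intro cs d k dflt
    obtain ⟨k1, k2⟩ := k
    simp only [List.foldl_cons]
    rw [ih, pvDictRowFill]
    by_cases h1 : k1 ∈ rs <;> by_cases h3 : k1 = r <;> by_cases h2 : k2 ∈ cs <;>
      simp [h1, h3, h2, List.mem_cons]

theorem pvPaint_getD (bg : Int) :
    ∀ (boxes : List (Int × Int × Int × Int × Int)) (r c : Int),
      (boxes.foldl (fun d b =>
        (PySem.List.pyRange b.1 (b.2.2.1 + 1) 1).foldl (fun d r =>
          (PySem.List.pyRange b.2.1 (b.2.2.2.1 + 1) 1).foldl (fun d c =>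
            d.insert (r, c) b.2.2.2.2) d) d)
        (PySem.Dict.empty : PySem.Dict (Int × Int) Int)).getD (r, c) bg =
      pvCell boxes bg r c := by
  intro boxes
  induction boxes using List.reverseRecOn with
  | nil => intro r c; simp [pvCell]
  | append_singleton boxes b ih =>
    intro r c
    rw [List.foldl_append, List.foldl_cons, List.foldl_nil, pvDictBoxFill, pvCell_append, ih]
    simp only [PySem.List.mem_pyRange_one]
    by_cases h : b.1 ≤ r ∧ r ≤ b.2.2.1 ∧ b.2.1 ≤ c ∧ c ≤ b.2.2.2.1
    · rw [if_pos ⟨⟨h.1, by omega⟩, h.2.2.1, by omega⟩, if_pos h]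
    · rw [if_neg ?_, if_neg h]
      rintro ⟨⟨g1, g2⟩, g3, g4⟩
      exact h ⟨g1, by omega, g3, by omega⟩

-- ---- the fuel suffices: the initial measure is below (rows*cols)^2 ----
theorem pvLab_spec (grid : List (List Int)) (rows cols bg : Int)
    (hr : 0 ≤ rows) (hc : 0 ≤ cols) :
    ∃ g, pvIterL grid rows cols bg
        (rows.toNat * cols.toNat * (rows.toNat * cols.toNat) + 1)
        (pvLab0 grid rows cols bg) = pvMkM rows cols g ∧
      pvLInv grid rows cols bg g ∧
      pvStepM grid rows cols bg (pvMkM rows cols g) = pvMkM rows cols g := by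
  have hcast : (rows * cols).toNat = rows.toNat * cols.toNat := by
    rw [← Int.toNat_of_nonneg hr, ← Int.toNat_of_nonneg hc, ← Nat.cast_mul,
      Int.toNat_natCast, Int.toNat_natCast, Int.toNat_natCast]
  have hbound : pvMeas rows cols
      (fun r c => if pvGridAt grid r c ≠ bg then pvIdx cols (r, c) else -1) <
      rows.toNat * cols.toNat * (rows.toNat * cols.toNat) + 1 := by
    unfold pvMeas
    have hterm : ∀ v ∈ (pvCellsL rows cols).map (fun p =>
        ((if pvGridAt grid p.1 p.2 ≠ bg then pvIdx cols (p.1, p.2) else -1) : Int).toNat),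
        v ≤ rows.toNat * cols.toNat := by
      intro v hv
      rcases List.mem_map.mp hv with ⟨p, hp, rfl⟩
      have hin := (mem_pvCellsL p).mp hp
      by_cases h : pvGridAt grid p.1 p.2 ≠ bg
      · rw [if_pos h]
        have h1 := pvIdx_le rows cols p hin
        have h2 : pvIdx cols (p.1, p.2) ≤ rows * cols := by
          have : pvIdx cols (p.1, p.2) = pvIdx cols p := rfl
          omega
        calc (pvIdx cols (p.1, p.2)).toNat ≤ (rows * cols).toNat := by
              exact_mod_cast Int.toNat_le_toNat h2
          _ = rows.toNat * cols.toNat := hcast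
      · rw [if_neg h]
        simp
    calc ((pvCellsL rows cols).map (fun p =>
          ((if pvGridAt grid p.1 p.2 ≠ bg then pvIdx cols (p.1, p.2) else -1) : Int).toNat)).sum
        ≤ ((pvCellsL rows cols).map (fun p =>
          ((if pvGridAt grid p.1 p.2 ≠ bg then pvIdx cols (p.1, p.2) else -1) : Int).toNat)).length
            • (rows.toNat * cols.toNat) := List.sum_le_card_nsmul _ _ hterm
      _ = rows.toNat * cols.toNat * (rows.toNat * cols.toNat) := by
          rw [List.length_map, length_pvCellsL, smul_eq_mul]
      _ < rows.toNat * cols.toNat * (rows.toNat * cols.toNat) + 1 := Nat.lt_succ_self _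
  exact pvIter_fix grid rows cols bg _ _ (pvLInv_init grid rows cols bg) hbound

-- ===== VERDICT (by name: the statement is the Claim_ definition above) =====
theorem p_replace_each_object_with_color_spec : Claim_equal_p_replace_each_object_with_color := by
  intro grid _ _
  unfold Spec_p_replace_each_object_with_color
  unfold p_replace_each_object_with_color p_replace_each_object_with_color_alt
  simp only [pvBg_eq]
  have hr : (0:Int) ≤ PySem.List.len grid := by
    rw [PySem.List.len_eq]; exact Int.natCast_nonneg _
  have hc : (0:Int) ≤ (if grid ≠ [] then PySem.List.len (PySem.List.pyGetD grid 0 []) else 0) := by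
    split_ifs
    · rw [PySem.List.len_eq]; exact Int.natCast_nonneg _
    · exact le_refl 0
  obtain ⟨g, hg, hinvg, hfix⟩ := pvLab_spec grid (PySem.List.len grid)
    (if grid ≠ [] then PySem.List.len (PySem.List.pyGetD grid 0 []) else 0) (pvBgB grid) hr hc
  rw [hg]
  obtain ⟨hboxes, hok⟩ := pvScan_eq grid (PySem.List.len grid)
    (if grid ≠ [] then PySem.List.len (PySem.List.pyGetD grid 0 []) else 0) (pvBgB grid)
    g hinvg hfix
  rw [pvFill_eq grid _ _ _ _ _ hboxes hok rfl rfl]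
  exact List.map_congr_left (fun r _ =>
    List.map_congr_left (fun c _ => (pvPaint_getD (pvBgB grid) _ r c).symm))
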